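-- pv_equiv track=rewrite | github.com/Agentic-Environmental-Engineering/GymVerse | gem/gem/envs/RLVE/gcd_fibonacci_product_env.py | _precompute_f_fr
-- ===== SOURCE A (Python) =====
-- from typing import Any, Optional, SupportsFloat, Tuple
--
-- def _precompute_f_fr(max_n: int, MOD: int) -> Tuple[list[int], list[int]]:
--     """
--     Precompute f and fr arrays using a linear sieve for the Möbius function and
--     the alternating Fibonacci-like sequence transformation, then compute prefix products.
--     """
--     # Linear sieve to compute mu[1..max_n]
--     is_composite = [False] * (max_n + 1)
--     primes: list[int] = []
--     mu = [0] * (max_n + 1)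
--     mu[1] = 1
--     for i in range(2, max_n + 1):
--         if not is_composite[i]:
--             primes.append(i)
--             mu[i] = -1
--         for p in primes:
--             if i * p > max_n:
--                 break
--             is_composite[i * p] = True
--             if i % p == 0:
--                 mu[i * p] = 0
--                 break
--             else:
--                 mu[i * p] = -mu[i]
--
--     # Arrays f and fr
--     f = [1] * (max_n + 1)
--     fr = [1] * (max_n + 1)
--
--     # Generate sequence values and apply Möbius-weighted updates
--     A, B = 1, 0
--     for i in range(1, max_n + 1):
--         # Update the alternating Fibonacci-like sequence terms
--         B = (A + B) % MOD
--         A = (B - A) % MOD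
--
--         # Compute modular inverse of B (assumes B invertible modulo MOD)
--         invB = pow(B, MOD - 2, MOD)
--
--         # Apply contributions to f and fr using mu
--         for j in range(i, max_n + 1, i):
--             k = j // i
--             m = mu[k]
--             # Update f[j]
--             if m == -1:
--                 f[j] = f[j] * invB % MOD
--             elif m == 0:
--                 pass
--             else:  # m == 1
--                 f[j] = f[j] * B % MOD
--
--             # Update fr[j]: note fr uses G[1 - mu[k]]
--             if m == 1:
--                 fr[j] = fr[j] * invB % MOD
--             elif m == 0:
--                 pass
--             else:  # m == -1
--                 fr[j] = fr[j] * B % MOD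
--
--     # Prefix products
--     for i in range(1, max_n + 1):
--         f[i] = f[i - 1] * f[i] % MOD
--         fr[i] = fr[i - 1] * fr[i] % MOD
--
--     return f, fr
-- ===== SOURCE B (Python) =====
-- def _precompute_f_fr(max_n, MOD):
--     # Moebius values by divisor-sum inversion (sum of mu(d) over d | m is [m == 1]):
--     # no primality machinery at all.
--     mu = [0] * (max_n + 1)
--     mu[1] = 1
--     for i in range(1, max_n + 1):
--         for j in range(2 * i, max_n + 1, i):
--             mu[j] -= mu[i]
--
--     # Fibonacci residues and their pow(. , MOD-2, MOD) table, precomputed up front.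
--     fib = [0] * (max_n + 1)
--     a, b = 0, 1 % MOD
--     for i in range(1, max_n + 1):
--         fib[i] = b
--         a, b = b, (a + b) % MOD
--     inv = [pow(x, MOD - 2, MOD) for x in fib]
--
--     # One fused pass over j: each cell is a product over the divisors of j found in
--     # sqrt-paired order, and the prefix product is carried in the running (x, y).
--     f = [1]
--     fr = [1]
--     x, y = 1, 1
--     for j in range(1, max_n + 1):
--         r = 1
--         while r * r <= j:
--             if j % r == 0:
--                 for i in ((r, j // r) if r * r < j else (r,)):
--                     m = mu[j // i]
--                     if m == 1:
--                         x = x * fib[i] % MOD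
--                         y = y * inv[i] % MOD
--                     elif m == -1:
--                         x = x * inv[i] % MOD
--                         y = y * fib[i] % MOD
--             r += 1
--         f.append(x)
--         fr.append(y)
--     return f, fr
-- ===== Notes on version B (the rewrite author's own statement) =====
-- stated objective: alternative
-- what changed: A's linear prime sieve for the Moebius function is replaced by divisor-sum Moebius inversion (no primality machinery), and A's harmonic multiples sweep with inline sequence generation, per-step pow and a separate prefix-product pass is replaced by precomputed Fibonacci/pow tables plus one fused pass that builds each output cell by sqrt-paired divisor enumeration with the prefix product carried in a running accumulator.
-- outside the precondition, e.g. on _precompute_f_fr(1, -2): A returns ([1, -1], [1, -1]), B raises ValueError; on _precompute_f_fr(2, 0): A raises ZeroDivisionError, B raises ZeroDivisionError; on _precompute_f_fr(0, 5): A raises IndexError, B raises IndexError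
import Mathlib
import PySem

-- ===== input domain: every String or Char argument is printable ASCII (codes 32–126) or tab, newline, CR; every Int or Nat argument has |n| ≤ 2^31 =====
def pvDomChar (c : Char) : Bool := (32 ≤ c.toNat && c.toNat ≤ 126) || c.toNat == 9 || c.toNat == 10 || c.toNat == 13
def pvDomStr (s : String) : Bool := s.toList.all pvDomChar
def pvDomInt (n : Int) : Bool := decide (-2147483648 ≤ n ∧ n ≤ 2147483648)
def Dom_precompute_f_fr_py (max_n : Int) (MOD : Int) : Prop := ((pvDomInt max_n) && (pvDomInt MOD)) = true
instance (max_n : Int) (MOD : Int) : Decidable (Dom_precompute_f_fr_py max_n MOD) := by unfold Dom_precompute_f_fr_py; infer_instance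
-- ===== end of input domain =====

-- B replaces A's linear prime sieve by divisor-sum Moebius inversion (no primality
-- machinery), and A's harmonic multiples sweep with inline sequence generation, per-step
-- pow and separate prefix pass by precomputed Fibonacci/pow tables plus one fused pass
-- that builds each cell from its divisors in sqrt-paired order; alternative algorithm.

-- ===== PORT A =====

-- A's linear Moebius sieve.  Inner 'for p in primes' loop with its two breaks.
def pvSieveInner (n i : Nat) : List Nat → Array Bool → Array Int → Array Bool × Array Int
  | [], isC, mu => (isC, mu)
  | p :: ps, isC, mu =>
    if n < i * p then (isC, mu)
    else
      let isC := isC.setIfInBounds (i * p) true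
      if i % p = 0 then (isC, mu.setIfInBounds (i * p) 0)
      else pvSieveInner n i ps isC (mu.setIfInBounds (i * p) (-(mu.getD i 0)))

def pvSieveStep (n : Nat) (st : List Nat × Array Bool × Array Int) (i : Nat) :
    List Nat × Array Bool × Array Int :=
  let (primes, isC, mu) := st
  let (primes, mu) :=
    if isC.getD i false then (primes, mu) else (primes ++ [i], mu.setIfInBounds i (-1))
  let (isC, mu) := pvSieveInner n i primes isC mu
  (primes, isC, mu)

def pvMuSieve (n : Nat) : Array Int :=
  ((List.range' 2 (n - 1)).foldl (pvSieveStep n)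
    ([], Array.replicate (n + 1) false, (Array.replicate (n + 1) (0 : Int)).setIfInBounds 1 1)).2.2

-- Shared helper: Python's three-argument pow(b, e, m) for m ≥ 1, e ≥ 0 (square-and-multiply
-- with reduction at every step, as CPython computes it).
def pvPow (b : Int) : Nat → Int → Int
  | 0, m => 1 % m
  | e + 1, m =>
    let r := pvPow b ((e + 1) / 2) m
    if (e + 1) % 2 = 0 then r * r % m else r * r % m * (b % m) % m
decreasing_by exact Nat.div_lt_self (Nat.succ_pos e) one_lt_two

-- A's prefix-product tail.
def pvPrefix (n : Nat) (Mo : Int) (arr : Array Int) : Array Int :=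
  (List.range' 1 n).foldl
    (fun a i => a.setIfInBounds i (a.getD (i - 1) 0 * a.getD i 0 % Mo)) arr

-- A's inner loop: for j in range(i, max_n+1, i) — j runs over k*i, k = j // i.
def pA_inner (Mo : Int) (mu : Array Int) (i : Nat) (Bv iBv : Int) :
    List Nat → Array Int × Array Int → Array Int × Array Int
  | [], st => st
  | j :: js, (f, fr) =>
    let k := j / i
    let m := mu.getD k 0
    let f :=
      if m = -1 then f.setIfInBounds j (f.getD j 0 * iBv % Mo)
      else if m = 0 then f
      else f.setIfInBounds j (f.getD j 0 * Bv % Mo)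
    let fr :=
      if m = 1 then fr.setIfInBounds j (fr.getD j 0 * iBv % Mo)
      else if m = 0 then fr
      else fr.setIfInBounds j (fr.getD j 0 * Bv % Mo)
    pA_inner Mo mu i Bv iBv js (f, fr)

-- A's outer loop body: advance the alternating sequence, take pow, update the multiples of i.
def pA_step (n : Nat) (Mo : Int) (mu : Array Int)
    (st : Int × Int × Array Int × Array Int) (i : Nat) : Int × Int × Array Int × Array Int :=
  let (Av, Bv, f, fr) := st
  let Bv' := (Av + Bv) % Mo
  let Av' := (Bv' - Av) % Mo
  let iBv := pvPow Bv' (Mo - 2).toNat Mo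
  let r := pA_inner Mo mu i Bv' iBv ((List.range' 1 (n / i)).map (· * i)) (f, fr)
  (Av', Bv', r.1, r.2)

def precompute_f_fr_py (max_n : Int) (MOD : Int) : List Int × List Int :=
  let n := max_n.toNat
  let mu := pvMuSieve n
  let st := (List.range' 1 n).foldl (pA_step n MOD mu)
    (1, 0, Array.replicate (n + 1) (1 : Int), Array.replicate (n + 1) (1 : Int))
  let f := pvPrefix n MOD st.2.2.1
  let fr := pvPrefix n MOD st.2.2.2
  (f.toList, fr.toList)

-- ===== PORT B =====

-- B's Moebius sieve: divisor-sum inversion, mu[j] -= mu[i] over the multiples j of i.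
def pB_muStep (n : Nat) (mu : Array Int) (i : Nat) : Array Int :=
  ((List.range' 2 (n / i - 1)).map (· * i)).foldl
    (fun mu j => mu.setIfInBounds j (mu.getD j 0 - mu.getD i 0)) mu

def pB_mu (n : Nat) : Array Int :=
  (List.range' 1 n).foldl (pB_muStep n) ((Array.replicate (n + 1) (0 : Int)).setIfInBounds 1 1)

-- Fibonacci table mod MOD: fib[0] = 0; a, b = 0, 1 % MOD; fib[i] = b; a, b = b, (a+b) % MOD.
def pB_fibLoop (Mo : Int) : List Nat → Int × Int × Array Int → Int × Int × Array Int
  | [], st => st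
  | i :: is, (a, b, arr) => pB_fibLoop Mo is (b, (a + b) % Mo, arr.setIfInBounds i b)

def pB_fib (n : Nat) (Mo : Int) : Array Int :=
  (pB_fibLoop Mo (List.range' 1 n) (0, 1 % Mo, Array.replicate (n + 1) (0 : Int))).2.2

-- one divisor i of j: multiply the running pair by the table entries selected by mu[j // i]
def pB_useDiv (Mo : Int) (mu fib inv : Array Int) (j : Nat) (st : Int × Int) (i : Nat) :
    Int × Int :=
  let m := mu.getD (j / i) 0
  if m = 1 then (st.1 * fib.getD i 0 % Mo, st.2 * inv.getD i 0 % Mo)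
  else if m = -1 then (st.1 * inv.getD i 0 % Mo, st.2 * fib.getD i 0 % Mo)
  else st

-- loop body for one r: if j % r == 0, use r and (when r*r < j) its cofactor j // r
def pB_rStep (Mo : Int) (mu fib inv : Array Int) (j : Nat) (st : Int × Int) (r : Nat) :
    Int × Int :=
  if j % r = 0 then
    (if r * r < j then [r, j / r] else [r]).foldl (pB_useDiv Mo mu fib inv j) st
  else st

-- one j: the while loop 'r = 1; while r * r <= j' runs r over 1..Nat.sqrt j;
-- the updated running products are appended to the output lists.
def pB_jStep (Mo : Int) (mu fib inv : Array Int)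
    (st : List Int × List Int × Int × Int) (j : Nat) : List Int × List Int × Int × Int :=
  let (f, fr, x, y) := st
  let p := (List.range' 1 (Nat.sqrt j)).foldl (pB_rStep Mo mu fib inv j) (x, y)
  (f ++ [p.1], fr ++ [p.2], p.1, p.2)

def precompute_f_fr_py_alt (max_n : Int) (MOD : Int) : List Int × List Int :=
  let n := max_n.toNat
  let mu := pB_mu n
  let fib := pB_fib n MOD
  let inv := fib.map (fun x => pvPow x (MOD - 2).toNat MOD)
  let st := (List.range' 1 n).foldl (pB_jStep MOD mu fib inv) ([1], [1], 1, 1)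
  (st.1, st.2.1)

-- ===== PRECONDITION & SPEC =====
-- Pre_ excludes max_n ≤ 0 (A raises IndexError building mu), MOD = 0 (A raises
-- ZeroDivisionError) and MOD ≤ -2, where the pow exponent MOD-2 is negative: Python then
-- raises ValueError whenever a sequence value is non-invertible — an input-dependent set with
-- no closed form — and B's up-front inverse table (which also inverts fib[0] = 0) always
-- raises. MOD = 1 and MOD = -1, where the negative-exponent pow is total, stay inside.
def Pre_precompute_f_fr_py (max_n : Int) (MOD : Int) : Prop :=
  1 ≤ max_n ∧ (1 ≤ MOD ∨ MOD = -1)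
instance (max_n : Int) (MOD : Int) : Decidable (Pre_precompute_f_fr_py max_n MOD) := by
  unfold Pre_precompute_f_fr_py; infer_instance

def pvWitness_precompute_f_fr_py : Int × Int := (6, 7)

def Spec_precompute_f_fr_py (max_n : Int) (MOD : Int) (out : List Int × List Int) : Prop :=
  out = precompute_f_fr_py_alt max_n MOD
instance (max_n : Int) (MOD : Int) (out : List Int × List Int) :
    Decidable (Spec_precompute_f_fr_py max_n MOD out) := by
  unfold Spec_precompute_f_fr_py; infer_instance

-- ===== CLAIM (what is proved, stated in full; the proofs are below) =====
def Claim_equal_precompute_f_fr_py : Prop := ∀ (max_n : Int) (MOD : Int),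
  Dom_precompute_f_fr_py max_n MOD → Pre_precompute_f_fr_py max_n MOD →
  Spec_precompute_f_fr_py max_n MOD (precompute_f_fr_py max_n MOD)

-- ===== LEMMAS AND PROOFS =====

set_option maxHeartbeats 1000000

-- ---- abbreviations used only by the proofs ----

def pvMuI (m : Nat) : Int := ArithmeticFunction.moebius m
def pvMM (Mo a x : Int) : Int := a * x % Mo
def pvMfib (Mo : Int) (i : Nat) : Int := (Nat.fib i : Int) % Mo
def pvWneg (Mo : Int) (i : Nat) : Int := pvPow (pvMfib Mo i) (Mo - 2).toNat Mo
def pvWp (Mo m : Int) (i : Nat) : Int × Int :=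
  if m = 1 then (pvMfib Mo i, pvWneg Mo i) else (pvWneg Mo i, pvMfib Mo i)
-- A-side divisor lists, parametric in the mu array
def pvDFA (mu : Array Int) (t j : Nat) : List Nat :=
  (List.range' 1 t).filter (fun i => decide (i ∣ j) && !(mu.getD (j / i) 0 == 0))
def pvLA (Mo : Int) (mu : Array Int) (t j : Nat) : List (Int × Int) :=
  (pvDFA mu t j).map (fun i => pvWp Mo (mu.getD (j / i) 0) i)
-- canonical (true-Moebius) divisor and weight lists
def pvD (t j : Nat) : List Nat :=
  (List.range' 1 t).filter (fun i => decide (i ∣ j) && !(pvMuI (j / i) == 0))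
def pvL (Mo : Int) (t j : Nat) : List (Int × Int) :=
  (pvD t j).map (fun i => pvWp Mo (pvMuI (j / i)) i)
-- B's sqrt-paired divisor enumeration
def pvED (j : Nat) : List Nat :=
  (List.range' 1 (Nat.sqrt j)).flatMap
    (fun r => if j % r = 0 then (if r * r < j then [r, j / r] else [r]) else [])
def pvMuOK (mu : Array Int) : Prop :=
  ∀ k, mu.getD k 0 = -1 ∨ mu.getD k 0 = 0 ∨ mu.getD k 0 = 1

-- the cell value and running chain both programs compute
def pvCellF (Mo : Int) (j : Nat) : Int := ((pvL Mo j j).map Prod.fst).foldl (pvMM Mo) 1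
def pvCellR (Mo : Int) (j : Nat) : Int := ((pvL Mo j j).map Prod.snd).foldl (pvMM Mo) 1
def pvChain (Mo : Int) (cell : Nat → Int) : Nat → Int
  | 0 => 1
  | m + 1 => pvChain Mo cell m * cell (m + 1) % Mo

-- ---- generic small lemmas ----

theorem pv_getD_set {α : Type} (a : Array α) (i : Nat) (v d : α) (j : Nat) :
    (a.setIfInBounds i v).getD j d = if i = j ∧ i < a.size then v else a.getD j d := by
  rw [Array.getD_eq_getD_getElem?, Array.getD_eq_getD_getElem?, Array.getElem?_setIfInBounds]
  by_cases h1 : i = j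
  · subst h1
    by_cases h2 : i < a.size
    · simp [h2]
    · simp [h2]
  · simp [h1]

theorem pv_foldl_range'_succ {σ : Type} (f : σ → Nat → σ) (s : σ) (t : Nat) :
    (List.range' 1 (t + 1)).foldl f s = f ((List.range' 1 t).foldl f s) (t + 1) := by
  rw [List.range'_concat, List.foldl_append]
  simp [Nat.add_comm]

theorem pv_foldl_mm (Mo : Int) : ∀ (l : List Int) (acc : Int),
    l.foldl (pvMM Mo) acc = if l.isEmpty then acc else acc * l.prod % Mo := by
  intro l
  induction l with
  | nil => intro acc; simp
  | cons x xs ih =>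
    intro acc
    simp only [List.foldl_cons, ih, List.isEmpty_cons, List.prod_cons]
    cases xs with
    | nil => simp [pvMM]
    | cons y ys =>
      have h1 : pvMM Mo acc x * (y :: ys).prod % Mo = acc * (x * (y :: ys).prod) % Mo := by
        unfold pvMM
        rw [Int.mul_emod (acc * x % Mo), Int.emod_emod_of_dvd _ dvd_rfl, ← Int.mul_emod,
          mul_assoc]
      simp only [List.isEmpty_cons, Bool.false_eq_true, if_false, h1]

theorem pv_fib_add (Mo : Int) (s : Nat) :
    (pvMfib Mo s + pvMfib Mo (s + 1)) % Mo = pvMfib Mo (s + 2) := by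
  unfold pvMfib
  rw [← Int.add_emod, Nat.fib_add_two]
  push_cast
  ring_nf

theorem pv_fib_sub (Mo : Int) (s : Nat) :
    (pvMfib Mo (s + 2) - pvMfib Mo s) % Mo = pvMfib Mo (s + 1) := by
  unfold pvMfib
  rw [← Int.sub_emod, Nat.fib_add_two]
  push_cast
  ring_nf

theorem pv_mul_mod_mod (Mo a p : Int) : a * (p % Mo) % Mo = a * p % Mo := by
  rw [Int.mul_emod a (p % Mo), Int.emod_emod_of_dvd _ dvd_rfl, ← Int.mul_emod]

theorem pv_foldl_inv {σ : Type} (P : σ → Prop) (f : σ → Nat → σ)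
    (h : ∀ s x, P s → P (f s x)) : ∀ (l : List Nat) (s : σ), P s → P (l.foldl f s) := by
  intro l
  induction l with
  | nil => intro s hs; exact hs
  | cons x xs ih => intro s hs; exact ih _ (h s x hs)

-- ---- Moebius facts ----

theorem pv_mu_one : pvMuI 1 = 1 := by simp [pvMuI]

theorem pv_mu_or (m : Nat) : pvMuI m = -1 ∨ pvMuI m = 0 ∨ pvMuI m = 1 := by
  unfold pvMuI
  rcases ArithmeticFunction.moebius_eq_or m with h | h | h
  · exact Or.inr (Or.inl h)
  · exact Or.inr (Or.inr h)
  · exact Or.inl h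

theorem pv_mu_prime {p : Nat} (hp : p.Prime) : pvMuI p = -1 := by
  simp [pvMuI, ArithmeticFunction.moebius_apply_prime hp]

theorem pv_mu_mul_prime_not_dvd {i p : Nat} (hp : p.Prime) (hpd : ¬ p ∣ i) :
    pvMuI (i * p) = -pvMuI i := by
  unfold pvMuI
  rw [ArithmeticFunction.isMultiplicative_moebius.map_mul_of_coprime
    (Nat.Coprime.symm ((Nat.Prime.coprime_iff_not_dvd hp).mpr hpd)),
    ArithmeticFunction.moebius_apply_prime hp]
  ring

theorem pv_mu_mul_prime_dvd {i p : Nat} (hp : p.Prime) (hpd : p ∣ i) :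
    pvMuI (i * p) = 0 := by
  unfold pvMuI
  rw [ArithmeticFunction.moebius_eq_zero_of_not_squarefree]
  intro hsq
  have h2 : p * p ∣ i * p := mul_dvd_mul_right hpd p
  have h3 := Nat.isUnit_iff.mp (hsq p h2)
  have := hp.two_le
  omega

-- sum of moebius over the divisors
theorem pv_mu_sum_divisors (m : Nat) :
    ∑ d ∈ m.divisors, pvMuI d = if m = 1 then 1 else 0 := by
  have h : (ArithmeticFunction.moebius * ↑ArithmeticFunction.zeta : ArithmeticFunction ℤ) m
      = (1 : ArithmeticFunction ℤ) m := by rw [ArithmeticFunction.moebius_mul_coe_zeta]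
  rw [ArithmeticFunction.coe_mul_zeta_apply, ArithmeticFunction.one_apply] at h
  simpa [pvMuI] using h

-- the Moebius array only holds -1, 0, 1 (needed by the A-phase characterization)
theorem pv_muOK_set (mu : Array Int) (h : pvMuOK mu) (i : Nat) (v : Int)
    (hv : v = -1 ∨ v = 0 ∨ v = 1) : pvMuOK (mu.setIfInBounds i v) := by
  intro k
  rw [pv_getD_set]
  split_ifs
  · exact hv
  · exact h k

theorem pv_muOK_inner (n i : Nat) : ∀ (ps : List Nat) (isC : Array Bool) (mu : Array Int),
    pvMuOK mu → pvMuOK (pvSieveInner n i ps isC mu).2 := by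
  intro ps
  induction ps with
  | nil => intro isC mu h; simpa [pvSieveInner] using h
  | cons p ps ih =>
    intro isC mu h
    rw [pvSieveInner]
    by_cases h1 : n < i * p
    · simpa [h1] using h
    · simp only [h1, if_false]
      by_cases h2 : i % p = 0
      · simp only [h2, if_true]
        exact pv_muOK_set mu h _ 0 (Or.inr (Or.inl rfl))
      · simp only [if_neg h2]
        refine ih _ _ (pv_muOK_set mu h _ _ ?_)
        rcases h i with h3 | h3 | h3 <;> rw [h3] <;> simp

theorem pv_muOK_sieve (n : Nat) : pvMuOK (pvMuSieve n) := by
  unfold pvMuSieve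
  refine pv_foldl_inv (fun st => pvMuOK st.2.2) (pvSieveStep n) ?_ _ _ ?_
  · rintro ⟨primes, isC, mu⟩ x h
    unfold pvSieveStep
    by_cases hc : isC.getD x false
    · simpa [hc] using pv_muOK_inner n x primes isC mu h
    · simp only [hc, Bool.false_eq_true, if_false]
      exact pv_muOK_inner n x _ _ _ (pv_muOK_set mu h x (-1) (Or.inl rfl))
  · refine pv_muOK_set _ ?_ 1 1 (Or.inr (Or.inr rfl))
    intro k
    rw [Array.getD_eq_getD_getElem?, Array.getElem?_replicate]
    split_ifs <;> simp

-- ---- B's divisor-sum sieve computes the Moebius function ----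

-- partial sum of Moebius over proper divisors ≤ t
def pvSB (m t : Nat) : Int :=
  (((List.range' 1 t).filter (fun d => decide (d ∣ m) && decide (d < m))).map pvMuI).sum

theorem pvSB_succ (m t : Nat) :
    pvSB m (t + 1) = pvSB m t + (if (t + 1) ∣ m ∧ t + 1 < m then pvMuI (t + 1) else 0) := by
  unfold pvSB
  rw [List.range'_concat, List.filter_append, List.map_append, List.sum_append]
  congr 1
  have h1t : 1 + 1 * t = t + 1 := by omega
  rw [h1t]
  simp only [List.filter_singleton]
  by_cases h1 : (t + 1) ∣ m
  · by_cases h2 : t + 1 < m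
    · rw [if_pos ⟨h1, h2⟩]
      simp [h1, h2]
    · rw [if_neg (by tauto)]
      simp [h1, h2]
  · rw [if_neg (by tauto)]
    simp [h1]

theorem pvSB_stable {m t : Nat} (h : m - 1 ≤ t) : pvSB m t = pvSB m (m - 1) := by
  unfold pvSB
  have hsplit : List.range' 1 t = List.range' 1 (m - 1) ++ List.range' (1 + 1 * (m - 1)) (t - (m - 1)) := by
    rw [List.range'_append]
    congr 1
    omega
  rw [hsplit, List.filter_append]
  have hnil : List.filter (fun d => decide (d ∣ m) && decide (d < m))
      (List.range' (1 + 1 * (m - 1)) (t - (m - 1))) = [] := by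
    rw [List.filter_eq_nil_iff]
    intro a ha
    rw [List.mem_range'_1] at ha
    have : ¬ (a < m) := by omega
    simp [this]
  rw [hnil, List.append_nil]

theorem pv_mu_rec (m : Nat) (hm : 1 ≤ m) :
    pvMuI m = (if m = 1 then 1 else 0) - pvSB m (m - 1) := by
  have hnodup : ((List.range' 1 (m - 1)).filter
      (fun d => decide (d ∣ m) && decide (d < m))).Nodup :=
    (List.nodup_range' (step := 1)).filter _
  have hfin : ((List.range' 1 (m - 1)).filter
      (fun d => decide (d ∣ m) && decide (d < m))).toFinset = m.properDivisors := by
    refine Finset.ext ?_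
    intro x
    rw [List.mem_toFinset, List.mem_filter, List.mem_range'_1, Nat.mem_properDivisors]
    constructor
    · rintro ⟨-, hx⟩
      simp only [Bool.and_eq_true, decide_eq_true_eq] at hx
      exact hx
    · rintro ⟨hd, hlt⟩
      have h1 : 1 ≤ x := Nat.pos_of_dvd_of_pos hd (by omega)
      exact ⟨⟨h1, by omega⟩, by simp [hd, hlt]⟩
  have hsum : pvSB m (m - 1) = ∑ d ∈ m.properDivisors, pvMuI d := by
    unfold pvSB
    rw [← hfin, List.sum_toFinset pvMuI hnodup]
  have hins : insert m m.properDivisors = m.divisors :=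
    Nat.insert_self_properDivisors (by omega)
  have hnotmem : m ∉ m.properDivisors := by
    rw [Nat.mem_properDivisors]
    rintro ⟨-, hlt⟩
    omega
  have htot := pv_mu_sum_divisors m
  rw [← hins, Finset.sum_insert hnotmem] at htot
  rw [hsum]
  omega

theorem pB_muInner_spec (n i : Nat) (hi : 1 ≤ i) :
    ∀ (c a : Nat) (mu : Array Int), 2 ≤ a → a + c ≤ n / i + 1 → mu.size = n + 1 →
    ((((List.range' a c).map (· * i)).foldl
        (fun mu j => mu.setIfInBounds j (mu.getD j 0 - mu.getD i 0)) mu)).size = n + 1 ∧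
    ∀ m, m ≤ n →
    (((List.range' a c).map (· * i)).foldl
        (fun mu j => mu.setIfInBounds j (mu.getD j 0 - mu.getD i 0)) mu).getD m 0 =
      mu.getD m 0 -
        (if (List.range' a c).any (fun k => m == k * i) then mu.getD i 0 else 0) := by
  intro c
  induction c with
  | zero =>
    intro a mu ha hc hsz
    refine ⟨hsz, ?_⟩
    intro m hm
    simp only [List.range'_zero, List.map_nil, List.foldl_nil, List.any_nil]
    rw [if_neg (by simp)]
    omega
  | succ c ih =>
    intro a mu ha hc hsz
    rw [List.range'_succ, List.map_cons, List.foldl_cons]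
    set mu1 := mu.setIfInBounds (a * i) (mu.getD (a * i) 0 - mu.getD i 0) with hmu1
    have hsz1 : mu1.size = n + 1 := by rw [hmu1, Array.size_setIfInBounds, hsz]
    have hbound : a * i ≤ n := by
      have hx1 : a ≤ n / i := by omega
      have hx2 : a * i ≤ (n / i) * i := Nat.mul_le_mul_right i hx1
      have hx3 := Nat.div_mul_le_self n i
      omega
    have hget1 : ∀ m : Nat, mu1.getD m 0 =
        if m = a * i then mu.getD (a * i) 0 - mu.getD i 0 else mu.getD m 0 := by
      intro m
      rw [hmu1, pv_getD_set]
      by_cases hx : m = a * i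
      · rw [if_pos hx, if_pos ⟨hx.symm, by omega⟩]
      · rw [if_neg hx, if_neg (by rintro ⟨h, -⟩; exact hx h.symm)]
    have hi_ne : i ≠ a * i := by
      intro h
      have : 2 * i ≤ a * i := Nat.mul_le_mul_right i ha
      omega
    have hgi : mu1.getD i 0 = mu.getD i 0 := by rw [hget1, if_neg (fun h => hi_ne h)]
    obtain ⟨ihs, ihg⟩ := ih (a + 1) mu1 (by omega) (by omega) hsz1
    refine ⟨ihs, ?_⟩
    intro m hm
    have hanyiff : ∀ (a' c' : Nat), ((List.range' a' c').any (fun k => m == k * i) = true) ↔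
        (∃ k, a' ≤ k ∧ k < a' + c' ∧ m = k * i) := by
      intro a' c'
      rw [List.any_eq_true]
      constructor
      · rintro ⟨k, hk, hbk⟩
        rw [List.mem_range'_1] at hk
        exact ⟨k, hk.1, by omega, by simpa using hbk⟩
      · rintro ⟨k, hk1, hk2, hk3⟩
        exact ⟨k, by rw [List.mem_range'_1]; omega, by simpa using hk3⟩
    rw [ihg m hm, hgi, hget1]
    by_cases hx : m = a * i
    · subst hx
      rw [if_pos rfl]
      have hno : ¬ ((List.range' (a + 1) c).any (fun k => a * i == k * i) = true) := by
        rw [hanyiff]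
        rintro ⟨k, hk1, hk2, hk3⟩
        have : k = a := Nat.eq_of_mul_eq_mul_right (by omega) hk3.symm
        omega
      rw [if_neg hno, if_pos (by simp [List.any_cons])]
      omega
    · rw [if_neg hx]
      by_cases hex : (List.range' (a + 1) c).any (fun k => m == k * i) = true
      · rw [if_pos hex, if_pos (by simp [List.any_cons, hex])]
      · rw [if_neg hex, if_neg ?_]
        simp only [List.any_cons, Bool.or_eq_true]
        rintro (h | h)
        · exact hx (by simpa using h)
        · exact hex h

theorem pB_muStep_spec (n : Nat) (mu : Array Int) (i : Nat) (hi : 1 ≤ i) (hin : i ≤ n)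
    (hsz : mu.size = n + 1) :
    (pB_muStep n mu i).size = n + 1 ∧
    ∀ m, m ≤ n → (pB_muStep n mu i).getD m 0 =
      mu.getD m 0 - (if i ∣ m ∧ i < m then mu.getD i 0 else 0) := by
  have hdiv1 : 1 ≤ n / i := by
    rw [Nat.le_div_iff_mul_le (by omega)]
    omega
  obtain ⟨hs, hg⟩ := pB_muInner_spec n i hi (n / i - 1) 2 mu (le_refl 2) (by omega) hsz
  refine ⟨hs, ?_⟩
  intro m hm
  rw [pB_muStep, hg m hm]
  congr 1
  have hiff : ((List.range' 2 (n / i - 1)).any (fun k => m == k * i) = true) ↔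
      (i ∣ m ∧ i < m) := by
    rw [List.any_eq_true]
    constructor
    · rintro ⟨k, hk, hbk⟩
      rw [List.mem_range'_1] at hk
      have hk3 : m = k * i := by simpa using hbk
      subst hk3
      refine ⟨dvd_mul_left i k, ?_⟩
      have : 2 * i ≤ k * i := Nat.mul_le_mul_right i (by omega)
      omega
    · rintro ⟨hd, hlt⟩
      obtain ⟨k, hk⟩ := hd
      have hki : 2 ≤ k := by
        rcases Nat.lt_or_ge k 2 with h' | h'
        · exfalso
          interval_cases k
          · simp at hk; omega
          · simp at hk; omega
        · exact h'
      have hkn : k ≤ n / i := by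
        have hdk : m / i = k := by rw [hk, Nat.mul_div_cancel_left k (by omega)]
        have h2 := Nat.div_le_div_right (c := i) hm
        omega
      refine ⟨k, by rw [List.mem_range'_1]; omega, ?_⟩
      simp [hk, Nat.mul_comm i k]
  by_cases h : i ∣ m ∧ i < m
  · rw [if_pos (hiff.mpr h), if_pos h]
  · rw [if_neg (fun hx => h (hiff.mp hx)), if_neg h]

def pB_muPartial (n t : Nat) : Array Int :=
  (List.range' 1 t).foldl (pB_muStep n) ((Array.replicate (n + 1) (0 : Int)).setIfInBounds 1 1)

theorem pB_mu_inv (n : Nat) : ∀ t, t ≤ n →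
    (pB_muPartial n t).size = n + 1 ∧
    ∀ m, m ≤ n → (pB_muPartial n t).getD m 0 = (if m = 1 then 1 else 0) - pvSB m t := by
  intro t
  induction t with
  | zero =>
    intro _
    refine ⟨by rw [pB_muPartial]; simp, ?_⟩
    intro m hm
    show ((Array.replicate (n + 1) (0 : Int)).setIfInBounds 1 1).getD m 0 = _
    rw [pv_getD_set]
    have hSB : pvSB m 0 = 0 := rfl
    rw [hSB]
    by_cases h : m = 1
    · subst h
      rw [if_pos ⟨rfl, by simp; omega⟩, if_pos rfl]
      omega
    · rw [if_neg (by rintro ⟨hx, -⟩; exact h hx.symm), if_neg h]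
      rw [Array.getD_eq_getD_getElem?, Array.getElem?_replicate, if_pos (by omega)]
      simp
  | succ t ih =>
    intro ht
    obtain ⟨ihs, ihg⟩ := ih (by omega)
    have hstep : pB_muPartial n (t + 1) = pB_muStep n (pB_muPartial n t) (t + 1) :=
      pv_foldl_range'_succ _ _ t
    have hval : (pB_muPartial n t).getD (t + 1) 0 = pvMuI (t + 1) := by
      rw [ihg (t + 1) (by omega), pvSB_stable (by omega : t + 1 - 1 ≤ t),
        ← pv_mu_rec (t + 1) (by omega)]
    obtain ⟨hs, hg⟩ := pB_muStep_spec n (pB_muPartial n t) (t + 1) (by omega) (by omega) ihs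
    rw [hstep]
    refine ⟨hs, ?_⟩
    intro m hm
    rw [hg m hm, ihg m hm, hval, pvSB_succ]
    omega

theorem pv_pBmu_eq (n : Nat) :
    ∀ m, 1 ≤ m → m ≤ n → (pB_mu n).getD m 0 = pvMuI m := by
  intro m h1 h2
  obtain ⟨-, hg⟩ := pB_mu_inv n n (le_refl n)
  have : pB_mu n = pB_muPartial n n := rfl
  rw [this, hg m h2, pvSB_stable (by omega : m - 1 ≤ n), ← pv_mu_rec m h1]

-- ---- A's linear sieve computes the Moebius function ----

def pA_sievePartial (n d : Nat) : List Nat × Array Bool × Array Int :=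
  (List.range' 2 d).foldl (pvSieveStep n)
    ([], Array.replicate (n + 1) false, (Array.replicate (n + 1) (0 : Int)).setIfInBounds 1 1)

-- the sieve invariant after the outer iterations 2 .. t
def pvSieveInv (n t : Nat) (st : List Nat × Array Bool × Array Int) : Prop :=
  st.1 = (List.range' 2 (t - 1)).filter (fun p => decide (Nat.Prime p)) ∧
  st.2.1.size = n + 1 ∧ st.2.2.size = n + 1 ∧
  (∀ m, m ≤ n → (st.2.1.getD m false = true ↔
      (2 ≤ m ∧ ¬ m.Prime ∧ m / m.minFac ≤ t))) ∧
  (∀ m, m ≤ n → st.2.2.getD m 0 =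
      if m = 1 then 1
      else if (m.Prime ∧ m ≤ t) ∨ (2 ≤ m ∧ ¬ m.Prime ∧ m / m.minFac ≤ t) then pvMuI m
      else 0)

theorem pv_mem_primesList {i q : Nat} (hi : 1 ≤ i) :
    q ∈ (List.range' 2 (i - 1)).filter (fun p => decide (Nat.Prime p)) ↔
      (2 ≤ q ∧ q ≤ i ∧ q.Prime) := by
  rw [List.mem_filter, List.mem_range'_1]
  simp only [decide_eq_true_eq]
  constructor
  · rintro ⟨⟨hq1, hq2⟩, hq3⟩
    exact ⟨hq1, by omega, hq3⟩
  · rintro ⟨hq1, hq2, hq3⟩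
    exact ⟨⟨hq1, by omega⟩, hq3⟩

theorem pvSieveInner_cons_stop (n i p0 : Nat) (ps : List Nat) (isC : Array Bool)
    (mu : Array Int) (h : n < i * p0) : pvSieveInner n i (p0 :: ps) isC mu = (isC, mu) := by
  rw [pvSieveInner, if_pos h]

theorem pvSieveInner_cons_dvd (n i p0 : Nat) (ps : List Nat) (isC : Array Bool)
    (mu : Array Int) (h1 : ¬ n < i * p0) (h2 : i % p0 = 0) :
    pvSieveInner n i (p0 :: ps) isC mu =
      (isC.setIfInBounds (i * p0) true, mu.setIfInBounds (i * p0) 0) := by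
  rw [pvSieveInner, if_neg h1]
  simp only [h2, if_true]

theorem pvSieveInner_cons_ndvd (n i p0 : Nat) (ps : List Nat) (isC : Array Bool)
    (mu : Array Int) (h1 : ¬ n < i * p0) (h2 : ¬ i % p0 = 0) :
    pvSieveInner n i (p0 :: ps) isC mu =
      pvSieveInner n i ps (isC.setIfInBounds (i * p0) true)
        (mu.setIfInBounds (i * p0) (-(mu.getD i 0))) := by
  rw [pvSieveInner, if_neg h1]
  simp only [h2, if_false]

-- the inner 'for p in primes' loop: exactly the multiples i*p with p up to the first
-- prime divisor of i are marked
theorem pvSieveInner_spec (n i : Nat) (hi : 2 ≤ i) :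
    ∀ (ps : List Nat) (isC : Array Bool) (mu : Array Int),
    ps.Pairwise (· < ·) → (∀ p ∈ ps, Nat.Prime p) →
    isC.size = n + 1 → mu.size = n + 1 →
    (pvSieveInner n i ps isC mu).1.size = n + 1 ∧
    (pvSieveInner n i ps isC mu).2.size = n + 1 ∧
    (∀ m,
      (¬ ∃ p, p ∈ ps ∧ m = i * p ∧ i * p ≤ n ∧ (∀ q ∈ ps, q < p → ¬ q ∣ i)) →
        (pvSieveInner n i ps isC mu).1.getD m false = isC.getD m false ∧
        (pvSieveInner n i ps isC mu).2.getD m 0 = mu.getD m 0) ∧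
    (∀ p, p ∈ ps → i * p ≤ n → (∀ q ∈ ps, q < p → ¬ q ∣ i) →
        (pvSieveInner n i ps isC mu).1.getD (i * p) false = true ∧
        (pvSieveInner n i ps isC mu).2.getD (i * p) 0 =
          (if p ∣ i then 0 else -(mu.getD i 0))) := by
  intro ps
  induction ps with
  | nil =>
    intro isC mu _ _ hs1 hs2
    exact ⟨hs1, hs2, fun m _ => ⟨rfl, rfl⟩, fun p hp => absurd hp (List.not_mem_nil)⟩
  | cons p0 ps ih =>
    intro isC mu hpair hprime hs1 hs2
    have hp0 : p0.Prime := hprime p0 List.mem_cons_self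
    have hpair' : ps.Pairwise (· < ·) := hpair.of_cons
    have hlt0 : ∀ q ∈ ps, p0 < q := (List.pairwise_cons.mp hpair).1
    have hprime' : ∀ p ∈ ps, p.Prime := fun p hp => hprime p (List.mem_cons_of_mem _ hp)
    by_cases h1 : n < i * p0
    · rw [pvSieveInner_cons_stop n i p0 ps isC mu h1]
      refine ⟨hs1, hs2, fun m _ => ⟨rfl, rfl⟩, ?_⟩
      intro p hp hle _
      exfalso
      rcases List.mem_cons.mp hp with hpp | hpp
      · subst hpp; omega
      · have : i * p0 ≤ i * p := Nat.mul_le_mul_left i (Nat.le_of_lt (hlt0 p hpp))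
        omega
    · have hle0 : i * p0 ≤ n := by omega
      have hbound : i * p0 < isC.size := by omega
      have hcond0 : ∀ q ∈ p0 :: ps, q < p0 → ¬ q ∣ i := by
        intro q hq hqlt
        exfalso
        rcases List.mem_cons.mp hq with h | h
        · omega
        · have := hlt0 q h; omega
      by_cases hmod : i % p0 = 0
      · rw [pvSieveInner_cons_dvd n i p0 ps isC mu h1 hmod]
        have hdvd0 : p0 ∣ i := Nat.dvd_of_mod_eq_zero hmod
        refine ⟨by simp [Array.size_setIfInBounds, hs1],
          by simp [Array.size_setIfInBounds, hs2], ?_, ?_⟩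
        · intro m hno
          have hne : m ≠ i * p0 := by
            intro h
            exact hno ⟨p0, List.mem_cons_self, h, hle0, hcond0⟩
          constructor
          · show (isC.setIfInBounds (i * p0) true).getD m false = isC.getD m false
            rw [pv_getD_set, if_neg (by rintro ⟨h, -⟩; exact hne h.symm)]
          · show (mu.setIfInBounds (i * p0) 0).getD m 0 = mu.getD m 0
            rw [pv_getD_set, if_neg (by rintro ⟨h, -⟩; exact hne h.symm)]
        · intro p hp hle hcond
          rcases List.mem_cons.mp hp with hpp | hpp
          · rw [hpp]
            constructor
            · show (isC.setIfInBounds (i * p0) true).getD (i * p0) false = true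
              rw [pv_getD_set, if_pos ⟨rfl, hbound⟩]
            · show (mu.setIfInBounds (i * p0) 0).getD (i * p0) 0 = _
              rw [pv_getD_set, if_pos ⟨rfl, by omega⟩, if_pos hdvd0]
          · exfalso
            exact hcond p0 List.mem_cons_self (hlt0 p hpp) hdvd0
      · rw [pvSieveInner_cons_ndvd n i p0 ps isC mu h1 hmod]
        set isC1 := isC.setIfInBounds (i * p0) true with hisC1
        set mu1 := mu.setIfInBounds (i * p0) (-(mu.getD i 0)) with hmu1
        have hs1' : isC1.size = n + 1 := by rw [hisC1, Array.size_setIfInBounds, hs1]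
        have hs2' : mu1.size = n + 1 := by rw [hmu1, Array.size_setIfInBounds, hs2]
        have hndvd0 : ¬ p0 ∣ i := fun h => hmod (Nat.mod_eq_zero_of_dvd h)
        have hne_i : i ≠ i * p0 := by
          intro h
          have : i * 2 ≤ i * p0 := Nat.mul_le_mul_left i hp0.two_le
          omega
        have hmu1_i : mu1.getD i 0 = mu.getD i 0 := by
          rw [hmu1, pv_getD_set, if_neg (by rintro ⟨h, -⟩; exact hne_i h.symm)]
        obtain ⟨ihs1, ihs2, ihu, ihw⟩ := ih isC1 mu1 hpair' hprime' hs1' hs2'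
        refine ⟨ihs1, ihs2, ?_, ?_⟩
        · intro m hno
          have hno' : ¬ ∃ p, p ∈ ps ∧ m = i * p ∧ i * p ≤ n ∧ (∀ q ∈ ps, q < p → ¬ q ∣ i) := by
            rintro ⟨p, hp, hm, hle, hcond⟩
            refine hno ⟨p, List.mem_cons_of_mem _ hp, hm, hle, ?_⟩
            intro q hq hqlt
            rcases List.mem_cons.mp hq with h | h
            · subst h; exact hndvd0
            · exact hcond q h hqlt
          have hne : m ≠ i * p0 := by
            intro h
            exact hno ⟨p0, List.mem_cons_self, h, hle0, hcond0⟩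
          obtain ⟨hu1, hu2⟩ := (ihu m) hno'
          constructor
          · rw [hu1, hisC1, pv_getD_set, if_neg (by rintro ⟨h, -⟩; exact hne h.symm)]
          · rw [hu2, hmu1, pv_getD_set, if_neg (by rintro ⟨h, -⟩; exact hne h.symm)]
        · intro p hp hle hcond
          rcases List.mem_cons.mp hp with hpp | hpp
          · rw [hpp]
            have hno' : ¬ ∃ p', p' ∈ ps ∧ i * p0 = i * p' ∧ i * p' ≤ n ∧
                (∀ q ∈ ps, q < p' → ¬ q ∣ i) := by
              rintro ⟨p', hp', hm, -, -⟩
              have : p0 = p' := Nat.eq_of_mul_eq_mul_left (by omega) hm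
              have := hlt0 p' hp'
              omega
            obtain ⟨hu1, hu2⟩ := (ihu (i * p0)) hno'
            constructor
            · rw [hu1, hisC1, pv_getD_set, if_pos ⟨rfl, hbound⟩]
            · rw [hu2, hmu1, pv_getD_set, if_pos ⟨rfl, by omega⟩, if_neg hndvd0]
          · have hcond' : ∀ q ∈ ps, q < p → ¬ q ∣ i := fun q hq =>
              hcond q (List.mem_cons_of_mem _ hq)
            obtain ⟨hw1, hw2⟩ := ihw p hpp hle hcond'
            exact ⟨hw1, by rw [hw2, hmu1_i]⟩

-- the inner write set, over the complete ascending prime list, is exactly the set of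
-- composites m = i * p with p = minFac m and m / p = i
theorem pv_written_iff {i m : Nat} (hi : 2 ≤ i) :
    (i ∣ m ∧ (m / i).Prime ∧ m / i ≤ Nat.minFac i) ↔
      (2 ≤ m ∧ ¬ m.Prime ∧ m / m.minFac = i) := by
  constructor
  · rintro ⟨hd, hp, hple⟩
    set p := m / i with hpdef
    have hm : i * p = m := Nat.mul_div_cancel' hd
    have h2m : 2 ≤ m := by
      have h4 : 2 * 2 ≤ i * p := Nat.mul_le_mul hi hp.two_le
      omega
    have hpd : p ∣ m := ⟨i, by rw [Nat.mul_comm p i]; omega⟩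
    have hminle : m.minFac ≤ p := Nat.minFac_le_of_dvd hp.two_le hpd
    have hminge : p ≤ m.minFac := by
      have hq : m.minFac.Prime := Nat.minFac_prime (by omega)
      have hqd : m.minFac ∣ i * p := hm ▸ Nat.minFac_dvd m
      rcases (Nat.Prime.dvd_mul hq).mp hqd with hqi | hqp
      · have h1 : Nat.minFac i ≤ m.minFac := Nat.minFac_le_of_dvd hq.two_le hqi
        omega
      · have : m.minFac = p := (Nat.prime_dvd_prime_iff_eq hq hp).mp hqp
        omega
    have hminfac : m.minFac = p := by omega
    have hnp : ¬ m.Prime := by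
      intro hP
      rcases (Nat.Prime.eq_one_or_self_of_dvd hP i hd) with h | h
      · omega
      · have : p = 1 := by
          have hx : i * p = i * 1 := by rw [Nat.mul_one, hm, ← h]
          exact Nat.eq_of_mul_eq_mul_left (by omega) hx
        have := hp.two_le
        omega
    refine ⟨h2m, hnp, ?_⟩
    rw [hminfac, ← hm, Nat.mul_div_cancel _ (by have := hp.two_le; omega)]
  · rintro ⟨h2m, hnp, hratio⟩
    have hpP : m.minFac.Prime := Nat.minFac_prime (by omega)
    have hpd : m.minFac ∣ m := Nat.minFac_dvd m
    have hd : i ∣ m := hratio ▸ Nat.div_dvd_of_dvd hpd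
    have hdiv : m / i = m.minFac := by
      rw [← hratio, Nat.div_div_self hpd (by omega)]
    refine ⟨hd, by rw [hdiv]; exact hpP, ?_⟩
    rw [hdiv]
    have hiF : (Nat.minFac i).Prime := Nat.minFac_prime (by omega)
    have : Nat.minFac i ∣ m := dvd_trans (Nat.minFac_dvd i) hd
    exact Nat.minFac_le_of_dvd hiF.two_le this

theorem pvSieveStep_eq_notyet (n : Nat) (primes : List Nat) (isC : Array Bool)
    (mu : Array Int) (i : Nat) (h : isC.getD i false = false) :
    pvSieveStep n (primes, isC, mu) i =
      (primes ++ [i],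
       (pvSieveInner n i (primes ++ [i]) isC (mu.setIfInBounds i (-1))).1,
       (pvSieveInner n i (primes ++ [i]) isC (mu.setIfInBounds i (-1))).2) := by
  rw [pvSieveStep]
  simp only [h, Bool.false_eq_true, if_false]

theorem pvSieveStep_eq_known (n : Nat) (primes : List Nat) (isC : Array Bool)
    (mu : Array Int) (i : Nat) (h : isC.getD i false = true) :
    pvSieveStep n (primes, isC, mu) i =
      (primes, (pvSieveInner n i primes isC mu).1, (pvSieveInner n i primes isC mu).2) := by
  rw [pvSieveStep]
  simp only [h, if_true]

-- the common part of one outer iteration: the inner sweep over the full prime list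
theorem pv_sieve_step_main (n t i : Nat) (hti : i = t + 1) (hin : i ≤ n) (hi2 : 2 ≤ i)
    (primes2 : List Nat) (isC : Array Bool) (mu2 : Array Int)
    (hprimes2 : primes2 = (List.range' 2 (i - 1)).filter (fun p => decide (Nat.Prime p)))
    (hs1 : isC.size = n + 1) (hs2 : mu2.size = n + 1)
    (hisC : ∀ m, m ≤ n → (isC.getD m false = true ↔
        (2 ≤ m ∧ ¬ m.Prime ∧ m / m.minFac ≤ t)))
    (hmu2 : ∀ m, m ≤ n → mu2.getD m 0 = if m = 1 then 1
        else if (m.Prime ∧ m ≤ i) ∨ (2 ≤ m ∧ ¬ m.Prime ∧ m / m.minFac ≤ t) then pvMuI m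
        else 0) :
    pvSieveInv n i (primes2, (pvSieveInner n i primes2 isC mu2).1,
      (pvSieveInner n i primes2 isC mu2).2) := by
  have hpair : primes2.Pairwise (· < ·) := by
    rw [hprimes2]
    exact (List.pairwise_lt_range' (s := 2) (n := i - 1) 1).filter _
  have hprime : ∀ p ∈ primes2, p.Prime := by
    intro p hp
    rw [hprimes2, List.mem_filter] at hp
    simpa using hp.2
  obtain ⟨hI1, hI2, hIu, hIw⟩ := pvSieveInner_spec n i hi2 primes2 isC mu2 hpair hprime hs1 hs2
  have hmem : ∀ q, q ∈ primes2 ↔ (2 ≤ q ∧ q ≤ i ∧ q.Prime) := fun q =>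
    hprimes2 ▸ pv_mem_primesList (by omega)
  -- value of mu2 at i
  have hmu2i : mu2.getD i 0 = pvMuI i := by
    rw [hmu2 i hin, if_neg (by omega)]
    by_cases hiP : i.Prime
    · rw [if_pos (Or.inl ⟨hiP, le_refl i⟩)]
    · have hF : i.minFac.Prime := Nat.minFac_prime (by omega)
      have hr : i / i.minFac ≤ i / 2 := Nat.div_le_div_left hF.two_le (by omega)
      rw [if_pos (Or.inr ⟨hi2, hiP, by omega⟩)]
  -- the hit set
  have hhit : ∀ m, m ≤ n →
      ((∃ p, p ∈ primes2 ∧ m = i * p ∧ i * p ≤ n ∧ (∀ q ∈ primes2, q < p → ¬ q ∣ i)) ↔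
        (2 ≤ m ∧ ¬ m.Prime ∧ m / m.minFac = i)) := by
    intro m hmn
    constructor
    · rintro ⟨p, hp, hm, hle, hcond⟩
      have hpP : p.Prime := hprime p hp
      have hd : i ∣ m := ⟨p, hm⟩
      have hdiv : m / i = p := by rw [hm, Nat.mul_div_cancel_left p (by omega)]
      have hple : m / i ≤ Nat.minFac i := by
        rw [hdiv]
        by_contra hcon
        have hqP : (Nat.minFac i).Prime := Nat.minFac_prime (by omega)
        have hqmem : Nat.minFac i ∈ primes2 := by
          rw [hmem]
          exact ⟨hqP.two_le, Nat.minFac_le (by omega), hqP⟩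
        exact hcond (Nat.minFac i) hqmem (by omega) (Nat.minFac_dvd i)
      exact (pv_written_iff hi2).mp ⟨hd, by rw [hdiv]; exact hpP, hple⟩
    · intro hrhs
      obtain ⟨hd, hpP, hple⟩ := (pv_written_iff hi2).mpr hrhs
      refine ⟨m / i, ?_, (Nat.mul_div_cancel' hd).symm, ?_, ?_⟩
      · rw [hmem]
        exact ⟨hpP.two_le, le_trans hple (Nat.minFac_le (by omega)), hpP⟩
      · rw [Nat.mul_div_cancel' hd]
        exact hmn
      · intro q hq hqlt hqd
        have hqP : q.Prime := hprime q hq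
        have : Nat.minFac i ≤ q := Nat.minFac_le_of_dvd hqP.two_le hqd
        omega
  refine ⟨hprimes2, hI1, hI2, ?_, ?_⟩
  · -- isC characterization at t + 1 = i
    intro m hmn
    by_cases hw : ∃ p, p ∈ primes2 ∧ m = i * p ∧ i * p ≤ n ∧ (∀ q ∈ primes2, q < p → ¬ q ∣ i)
    · obtain ⟨p, hp, hm, hle, hcond⟩ := hw
      obtain ⟨hw1, -⟩ := hIw p hp hle hcond
      rw [hm, hw1]
      have hr := (hhit m hmn).mp ⟨p, hp, hm, hle, hcond⟩
      rw [hm] at hr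
      simp only [true_iff]
      refine ⟨hr.1, hr.2.1, by omega⟩
    · obtain ⟨hu1, -⟩ := hIu m hw
      rw [hu1, hisC m hmn]
      constructor
      · rintro ⟨h2, hnp, hr⟩
        exact ⟨h2, hnp, by omega⟩
      · rintro ⟨h2, hnp, hr⟩
        refine ⟨h2, hnp, ?_⟩
        rcases Nat.lt_or_ge (m / m.minFac) i with h' | h'
        · omega
        · have : m / m.minFac = i := by omega
          exact absurd ((hhit m hmn).mpr ⟨h2, hnp, this⟩) hw
  · -- mu characterization at t + 1 = i
    intro m hmn
    by_cases hw : ∃ p, p ∈ primes2 ∧ m = i * p ∧ i * p ≤ n ∧ (∀ q ∈ primes2, q < p → ¬ q ∣ i)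
    · obtain ⟨p, hp, hm, hle, hcond⟩ := hw
      have hpP : p.Prime := hprime p hp
      obtain ⟨-, hw2⟩ := hIw p hp hle hcond
      have hr := (hhit m hmn).mp ⟨p, hp, hm, hle, hcond⟩
      rw [hm, hw2]
      rw [hm] at hr
      by_cases hpd : p ∣ i
      · rw [if_pos hpd, if_neg (by omega), if_pos (Or.inr ⟨hr.1, hr.2.1, by omega⟩),
          pv_mu_mul_prime_dvd hpP hpd]
      · rw [if_neg hpd, hmu2i, if_neg (by omega),
          if_pos (Or.inr ⟨hr.1, hr.2.1, by omega⟩), pv_mu_mul_prime_not_dvd hpP hpd]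
    · obtain ⟨-, hu2⟩ := hIu m hw
      rw [hu2, hmu2 m hmn]
      by_cases h1 : m = 1
      · rw [if_pos h1, if_pos h1]
      · rw [if_neg h1, if_neg h1]
        by_cases hc : (m.Prime ∧ m ≤ i) ∨ (2 ≤ m ∧ ¬ m.Prime ∧ m / m.minFac ≤ t)
        · rw [if_pos hc, if_pos ?_]
          rcases hc with hcp | ⟨h2, hnp, hr⟩
          · exact Or.inl hcp
          · exact Or.inr ⟨h2, hnp, by omega⟩
        · rw [if_neg hc, if_neg ?_]
          rintro (hcp | ⟨h2, hnp, hr⟩)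
          · exact hc (Or.inl hcp)
          · refine hc (Or.inr ⟨h2, hnp, ?_⟩)
            rcases Nat.lt_or_ge (m / m.minFac) i with h' | h'
            · omega
            · have : m / m.minFac = i := by omega
              exact absurd ((hhit m hmn).mpr ⟨h2, hnp, this⟩) hw

theorem pv_sieve_inv (n : Nat) : ∀ d, d + 1 ≤ n → pvSieveInv n (d + 1) (pA_sievePartial n d) := by
  intro d
  induction d with
  | zero =>
    intro _
    refine ⟨rfl, by simp [pA_sievePartial], by simp [pA_sievePartial], ?_, ?_⟩
    · intro m hm
      show (Array.replicate (n + 1) false).getD m false = true ↔ _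
      rw [Array.getD_eq_getD_getElem?, Array.getElem?_replicate, if_pos (by omega)]
      simp only [Option.getD_some]
      constructor
      · intro h; exact absurd h (by simp)
      · rintro ⟨h2, hnp, hle⟩
        exfalso
        have hF : m.minFac.Prime := Nat.minFac_prime (by omega)
        have hd := Nat.minFac_dvd m
        have h1 : m / m.minFac ≥ 2 := by
          by_contra hcon
          rcases Nat.lt_or_ge (m / m.minFac) 2 with hc | hc
          · interval_cases h : m / m.minFac
            · have hmm : m.minFac * (m / m.minFac) = m := Nat.mul_div_cancel' hd
              rw [h, Nat.mul_zero] at hmm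
              omega
            · have hmm : m.minFac * (m / m.minFac) = m := Nat.mul_div_cancel' hd
              rw [h, Nat.mul_one] at hmm
              exact hnp (hmm ▸ hF)
          · omega
        omega
    · intro m hm
      show ((Array.replicate (n + 1) (0 : Int)).setIfInBounds 1 1).getD m 0 = _
      rw [pv_getD_set]
      by_cases h1 : m = 1
      · subst h1
        rw [if_pos ⟨rfl, by simp; omega⟩, if_pos rfl]
      · rw [if_neg (by rintro ⟨h, -⟩; exact h1 h.symm), if_neg h1]
        have hcondF : ¬ ((m.Prime ∧ m ≤ 1) ∨ (2 ≤ m ∧ ¬ m.Prime ∧ m / m.minFac ≤ 1)) := by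
          rintro (⟨hP, hle⟩ | ⟨h2, hnp, hle⟩)
          · have := hP.two_le; omega
          · have hF : m.minFac.Prime := Nat.minFac_prime (by omega)
            have hd := Nat.minFac_dvd m
            have hmm : m.minFac * (m / m.minFac) = m := Nat.mul_div_cancel' hd
            rcases Nat.lt_or_ge (m / m.minFac) 2 with hc | hc
            · interval_cases h : m / m.minFac
              · omega
              · rw [Nat.mul_one] at hmm
                exact hnp (hmm ▸ hF)
            · omega
        rw [if_neg hcondF]
        rw [Array.getD_eq_getD_getElem?, Array.getElem?_replicate, if_pos (by omega)]
        simp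
  | succ d ihd =>
    intro hdn
    set t := d + 1 with htdef
    set i := d + 2 with hidef
    have hin : i ≤ n := by omega
    have hi2 : 2 ≤ i := by omega
    obtain ⟨hP1, hP2, hP3, hP4, hP5⟩ := ihd (by omega)
    have hstep : pA_sievePartial n (d + 1) =
        pvSieveStep n (pA_sievePartial n d) i := by
      have h3 := List.range'_concat (s := 2) (n := d) (step := 1)
      have h2 : List.range' 2 (d + 1) = List.range' 2 d ++ [i] := by
        rw [h3, show 2 + 1 * d = i by omega]
      rw [pA_sievePartial, h2, List.foldl_append, List.foldl_cons, List.foldl_nil]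
      rfl
    rcases hst : pA_sievePartial n d with ⟨primes, isC, mu⟩
    rw [hst] at hstep hP1 hP2 hP3 hP4 hP5
    simp only at hP1 hP2 hP3 hP4 hP5
    have hisCi : isC.getD i false = true ↔ ¬ i.Prime := by
      rw [hP4 i hin]
      constructor
      · rintro ⟨-, h, -⟩; exact h
      · intro h
        refine ⟨by omega, h, ?_⟩
        have hF : i.minFac.Prime := Nat.minFac_prime (by omega)
        have : i / i.minFac ≤ i / 2 := Nat.div_le_div_left hF.two_le (by omega)
        omega
    have hgoal : pvSieveInv n i (pA_sievePartial n (d + 1)) := by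
      rw [hstep]
      by_cases hiP : i.Prime
      · -- i is prime: appended to the list, mu[i] := -1
        have hflag : isC.getD i false = false := by
          rcases Bool.eq_false_or_eq_true (isC.getD i false) with h | h
          · exact absurd (hisCi.mp h) (by simpa using hiP)
          · exact h
        rw [pvSieveStep_eq_notyet n primes isC mu i hflag]
        set mu' := mu.setIfInBounds i (-1) with hmu'
        have hs2' : mu'.size = n + 1 := by rw [hmu', Array.size_setIfInBounds, hP3]
        have hmu'get : ∀ m : Nat, mu'.getD m 0 =
            if m = i then -1 else mu.getD m 0 := by
          intro m
          rw [hmu', pv_getD_set]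
          by_cases h : m = i
          · rw [if_pos h, if_pos ⟨h.symm, by omega⟩]
          · rw [if_neg h, if_neg (by rintro ⟨hx, -⟩; exact h hx.symm)]
        have hprimes' : primes ++ [i] =
            (List.range' 2 (i - 1)).filter (fun p => decide (Nat.Prime p)) := by
          rw [hP1]
          have hsplit : List.range' 2 (i - 1) = List.range' 2 (t - 1) ++ [i] := by
            have h3 := List.range'_concat (s := 2) (n := t - 1) (step := 1)
            rw [show i - 1 = t - 1 + 1 by omega, h3, show 2 + 1 * (t - 1) = i by omega]
          rw [hsplit, List.filter_append]
          simp [hiP]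
        refine pv_sieve_step_main n t i (by omega) hin hi2 (primes ++ [i]) isC mu'
          hprimes' hP2 hs2' hP4 ?_
        intro m hm
        rw [hmu'get]
        by_cases h : m = i
        · subst h
          rw [if_pos rfl, if_neg (by omega), if_pos (Or.inl ⟨hiP, le_refl i⟩),
            pv_mu_prime hiP]
        · rw [if_neg h, hP5 m hm]
          by_cases h1 : m = 1
          · rw [if_pos h1, if_pos h1]
          · rw [if_neg h1, if_neg h1]
            by_cases hc : (m.Prime ∧ m ≤ t) ∨ (2 ≤ m ∧ ¬ m.Prime ∧ m / m.minFac ≤ t)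
            · rw [if_pos hc, if_pos ?_]
              rcases hc with ⟨hp, hle⟩ | hcc
              · exact Or.inl ⟨hp, by omega⟩
              · exact Or.inr hcc
            · rw [if_neg hc, if_neg ?_]
              rintro (⟨hp, hle⟩ | hcc)
              · refine hc (Or.inl ⟨hp, ?_⟩)
                rcases Nat.lt_or_ge m i with h' | h'
                · omega
                · exact absurd (by omega : m = i) h
              · exact hc (Or.inr hcc)
      · -- i is composite: flag already set, nothing appended
        have hflag : isC.getD i false = true := hisCi.mpr hiP
        rw [pvSieveStep_eq_known n primes isC mu i hflag]
        have hprimes' : primes =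
            (List.range' 2 (i - 1)).filter (fun p => decide (Nat.Prime p)) := by
          rw [hP1]
          have hsplit : List.range' 2 (i - 1) = List.range' 2 (t - 1) ++ [i] := by
            have h3 := List.range'_concat (s := 2) (n := t - 1) (step := 1)
            rw [show i - 1 = t - 1 + 1 by omega, h3, show 2 + 1 * (t - 1) = i by omega]
          rw [hsplit, List.filter_append]
          simp [hiP]
        refine pv_sieve_step_main n t i (by omega) hin hi2 primes isC mu
          hprimes' hP2 hP3 hP4 ?_
        intro m hm
        rw [hP5 m hm]
        by_cases h1 : m = 1
        · rw [if_pos h1, if_pos h1]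
        · rw [if_neg h1, if_neg h1]
          by_cases hc : (m.Prime ∧ m ≤ t) ∨ (2 ≤ m ∧ ¬ m.Prime ∧ m / m.minFac ≤ t)
          · rw [if_pos hc, if_pos ?_]
            rcases hc with ⟨hp, hle⟩ | hcc
            · exact Or.inl ⟨hp, by omega⟩
            · exact Or.inr hcc
          · rw [if_neg hc, if_neg ?_]
            rintro (⟨hp, hle⟩ | hcc)
            · refine hc ?_
              rcases Nat.lt_or_ge m i with h' | h'
              · exact Or.inl ⟨hp, by omega⟩
              · have : m = i := by omega
                subst this
                exact absurd hp hiP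
            · exact hc (Or.inr hcc)
    exact hgoal

theorem pv_muSieve_eq (n : Nat) :
    ∀ m, 1 ≤ m → m ≤ n → (pvMuSieve n).getD m 0 = pvMuI m := by
  intro m h1 h2
  have hn : 1 ≤ n := le_trans h1 h2
  obtain ⟨-, -, -, -, hmu⟩ := pv_sieve_inv n (n - 1) (by omega)
  have heq : pvMuSieve n = (pA_sievePartial n (n - 1)).2.2 := rfl
  rw [heq, hmu m h2, show n - 1 + 1 = n by omega]
  by_cases hm1 : m = 1
  · subst hm1
    rw [if_pos rfl, pv_mu_one]
  · rw [if_neg hm1]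
    by_cases hP : m.Prime
    · rw [if_pos (Or.inl ⟨hP, h2⟩)]
    · have h2m : 2 ≤ m := by omega
      have hF : m.minFac.Prime := Nat.minFac_prime (by omega)
      have hle : m / m.minFac ≤ n := by
        have : m / m.minFac ≤ m / 2 := Nat.div_le_div_left hF.two_le (by omega)
        omega
      rw [if_pos (Or.inr ⟨h2m, hP, hle⟩)]

-- ---- A-side loop characterization (as in the ports' shapes) ----

theorem pA_inner_cons (Mo : Int) (mu : Array Int) (i : Nat) (Bv iBv : Int)
    (j : Nat) (js : List Nat) (f fr : Array Int) :
    pA_inner Mo mu i Bv iBv (j :: js) (f, fr) = pA_inner Mo mu i Bv iBv js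
      ((if mu.getD (j / i) 0 = -1 then f.setIfInBounds j (f.getD j 0 * iBv % Mo)
        else if mu.getD (j / i) 0 = 0 then f
        else f.setIfInBounds j (f.getD j 0 * Bv % Mo)),
       (if mu.getD (j / i) 0 = 1 then fr.setIfInBounds j (fr.getD j 0 * iBv % Mo)
        else if mu.getD (j / i) 0 = 0 then fr
        else fr.setIfInBounds j (fr.getD j 0 * Bv % Mo))) := rfl

theorem pA_inner_spec (Mo : Int) (mu : Array Int) (i : Nat) (hi : 0 < i) (Bv iBv : Int) :
    ∀ (c a : Nat) (f fr : Array Int),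
    (∀ k, a ≤ k → k < a + c → k * i < f.size ∧ k * i < fr.size) →
    ∀ (r : Array Int × Array Int),
      r = pA_inner Mo mu i Bv iBv ((List.range' a c).map (· * i)) (f, fr) →
    r.1.size = f.size ∧ r.2.size = fr.size ∧
    ∀ j : Nat,
      ((¬ ∃ k, a ≤ k ∧ k < a + c ∧ j = k * i) →
        r.1.getD j 0 = f.getD j 0 ∧ r.2.getD j 0 = fr.getD j 0) ∧
      ((∃ k, a ≤ k ∧ k < a + c ∧ j = k * i) →
        r.1.getD j 0 = (if mu.getD (j / i) 0 = -1 then f.getD j 0 * iBv % Mo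
          else if mu.getD (j / i) 0 = 0 then f.getD j 0 else f.getD j 0 * Bv % Mo) ∧
        r.2.getD j 0 = (if mu.getD (j / i) 0 = 1 then fr.getD j 0 * iBv % Mo
          else if mu.getD (j / i) 0 = 0 then fr.getD j 0 else fr.getD j 0 * Bv % Mo)) := by
  intro c
  induction c with
  | zero =>
    intro a f fr _ r hr
    simp only [List.range'_zero, List.map_nil, pA_inner] at hr
    subst hr
    refine ⟨rfl, rfl, ?_⟩
    intro j
    exact ⟨fun _ => ⟨rfl, rfl⟩, fun ⟨k, hk1, hk2, _⟩ => absurd (by omega : False) (fun h => h)⟩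
  | succ c ih =>
    intro a f fr hb r hr
    rw [List.range'_succ, List.map_cons, pA_inner_cons] at hr
    set m₀ := mu.getD (a * i / i) 0 with hm₀
    have hcan : a * i / i = a := Nat.mul_div_cancel a hi
    set f' := (if m₀ = -1 then f.setIfInBounds (a * i) (f.getD (a * i) 0 * iBv % Mo)
        else if m₀ = 0 then f
        else f.setIfInBounds (a * i) (f.getD (a * i) 0 * Bv % Mo)) with hf'
    set fr' := (if m₀ = 1 then fr.setIfInBounds (a * i) (fr.getD (a * i) 0 * iBv % Mo)
        else if m₀ = 0 then fr
        else fr.setIfInBounds (a * i) (fr.getD (a * i) 0 * Bv % Mo)) with hfr'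
    have hfs : f'.size = f.size := by
      rw [hf']; split_ifs <;> simp [Array.size_setIfInBounds]
    have hfrs : fr'.size = fr.size := by
      rw [hfr']; split_ifs <;> simp [Array.size_setIfInBounds]
    have hb' : ∀ k, a + 1 ≤ k → k < a + 1 + c → k * i < f'.size ∧ k * i < fr'.size := by
      intro k h1 h2
      rw [hfs, hfrs]
      exact hb k (by omega) (by omega)
    obtain ⟨ihs1, ihs2, ihj⟩ := ih (a + 1) f' fr' hb' r hr
    have hbound := hb a (by omega) (by omega)
    have hf'get : ∀ j : Nat, f'.getD j 0 =
        if j = a * i then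
          (if m₀ = -1 then f.getD j 0 * iBv % Mo
           else if m₀ = 0 then f.getD j 0 else f.getD j 0 * Bv % Mo)
        else f.getD j 0 := by
      intro j
      by_cases hj : j = a * i
      · subst hj
        rw [if_pos rfl, hf']
        split_ifs with h1 h2
        · rw [pv_getD_set]; simp [hbound.1]
        · rfl
        · rw [pv_getD_set]; simp [hbound.1]
      · rw [if_neg hj, hf']
        split_ifs with h1 h2
        · rw [pv_getD_set, if_neg (by rintro ⟨h, -⟩; exact hj h.symm)]
        · rfl
        · rw [pv_getD_set, if_neg (by rintro ⟨h, -⟩; exact hj h.symm)]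
    have hfr'get : ∀ j : Nat, fr'.getD j 0 =
        if j = a * i then
          (if m₀ = 1 then fr.getD j 0 * iBv % Mo
           else if m₀ = 0 then fr.getD j 0 else fr.getD j 0 * Bv % Mo)
        else fr.getD j 0 := by
      intro j
      by_cases hj : j = a * i
      · subst hj
        rw [if_pos rfl, hfr']
        split_ifs with h1 h2
        · rw [pv_getD_set]; simp [hbound.2]
        · rfl
        · rw [pv_getD_set]; simp [hbound.2]
      · rw [if_neg hj, hfr']
        split_ifs with h1 h2
        · rw [pv_getD_set, if_neg (by rintro ⟨h, -⟩; exact hj h.symm)]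
        · rfl
        · rw [pv_getD_set, if_neg (by rintro ⟨h, -⟩; exact hj h.symm)]
    refine ⟨by rw [ihs1, hfs], by rw [ihs2, hfrs], ?_⟩
    intro j
    by_cases hj : j = a * i
    · have hnot : ¬ ∃ k, a + 1 ≤ k ∧ k < a + 1 + c ∧ j = k * i := by
        rintro ⟨k, hk1, hk2, hk3⟩
        have : k = a := Nat.eq_of_mul_eq_mul_right hi (by rw [← hk3, hj])
        omega
      obtain ⟨hu1, hu2⟩ := (ihj j).1 hnot
      constructor
      · rintro hno
        exact absurd ⟨a, by omega, by omega, hj⟩ hno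
      · intro _
        rw [hu1, hu2, hf'get, hfr'get, if_pos hj, if_pos hj]
        rw [hcan] at hm₀
        rw [hj, hcan, ← hm₀]
        exact ⟨rfl, rfl⟩
    · have hf'j : f'.getD j 0 = f.getD j 0 := by rw [hf'get, if_neg hj]
      have hfr'j : fr'.getD j 0 = fr.getD j 0 := by rw [hfr'get, if_neg hj]
      constructor
      · intro hno
        have hno' : ¬ ∃ k, a + 1 ≤ k ∧ k < a + 1 + c ∧ j = k * i := by
          rintro ⟨k, hk1, hk2, hk3⟩
          exact hno ⟨k, by omega, by omega, hk3⟩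
        obtain ⟨hu1, hu2⟩ := (ihj j).1 hno'
        exact ⟨by rw [hu1, hf'j], by rw [hu2, hfr'j]⟩
      · rintro ⟨k, hk1, hk2, hk3⟩
        have hka : k ≠ a := fun h => hj (by rw [hk3, h])
        obtain ⟨hu1, hu2⟩ := (ihj j).2 ⟨k, by omega, by omega, hk3⟩
        exact ⟨by rw [hu1, hf'j], by rw [hu2, hfr'j]⟩

def pA_phase (n : Nat) (Mo : Int) (mu : Array Int) (t : Nat) : Int × Int × Array Int × Array Int :=
  (List.range' 1 t).foldl (pA_step n Mo mu)
    (1, 0, Array.replicate (n + 1) (1 : Int), Array.replicate (n + 1) (1 : Int))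

theorem pA_step_eq (n : Nat) (Mo : Int) (mu : Array Int) (Av Bv : Int) (f fr : Array Int)
    (i : Nat) :
    pA_step n Mo mu (Av, Bv, f, fr) i =
      (((Av + Bv) % Mo - Av) % Mo, (Av + Bv) % Mo,
       (pA_inner Mo mu i ((Av + Bv) % Mo) (pvPow ((Av + Bv) % Mo) (Mo - 2).toNat Mo)
          ((List.range' 1 (n / i)).map (· * i)) (f, fr)).1,
       (pA_inner Mo mu i ((Av + Bv) % Mo) (pvPow ((Av + Bv) % Mo) (Mo - 2).toNat Mo)
          ((List.range' 1 (n / i)).map (· * i)) (f, fr)).2) := rfl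

theorem pv_hit_iff {i j n : Nat} (hi : 1 ≤ i) (hj : 1 ≤ j) (hjn : j ≤ n) :
    (∃ k, 1 ≤ k ∧ k < 1 + n / i ∧ j = k * i) ↔ i ∣ j := by
  constructor
  · rintro ⟨k, _, _, rfl⟩
    exact dvd_mul_left i k
  · intro hd
    refine ⟨j / i, Nat.div_pos (Nat.le_of_dvd (by omega) hd) (by omega), ?_,
      (Nat.div_mul_cancel hd).symm⟩
    have := Nat.div_le_div_right (c := i) hjn
    omega

theorem pv_no_hit_zero {i c : Nat} (hi : 1 ≤ i) : ¬ ∃ k, 1 ≤ k ∧ k < 1 + c ∧ 0 = k * i := by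
  rintro ⟨k, hk1, _, hk3⟩
  have := Nat.mul_pos (by omega : 0 < k) (by omega : 0 < i)
  omega

theorem pvLA_succ (Mo : Int) (mu : Array Int) (t j : Nat) :
    pvLA Mo mu (t + 1) j = pvLA Mo mu t j ++
      (if (t + 1) ∣ j ∧ mu.getD (j / (t + 1)) 0 ≠ 0
       then [pvWp Mo (mu.getD (j / (t + 1)) 0) (t + 1)] else []) := by
  unfold pvLA pvDFA
  rw [List.range'_concat, List.filter_append, List.map_append]
  congr 1
  have h1t : 1 + 1 * t = t + 1 := by omega
  rw [h1t]
  simp only [List.filter_singleton]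
  by_cases h1 : (t + 1) ∣ j
  · by_cases h2 : mu.getD (j / (t + 1)) 0 = 0
    · have hp : (decide ((t + 1) ∣ j) && !(mu.getD (j / (t + 1)) 0 == 0)) = false := by
        rw [h2]
        simp
      rw [hp, if_neg (by rintro ⟨-, hne⟩; exact hne h2)]
      rfl
    · have hp : (decide ((t + 1) ∣ j) && !(mu.getD (j / (t + 1)) 0 == 0)) = true := by
        simp only [Bool.and_eq_true, decide_eq_true_eq, Bool.not_eq_true', beq_eq_false_iff_ne, ne_eq]
        exact ⟨h1, by simpa [Array.getD_eq_getD_getElem?] using h2⟩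
      rw [hp, if_pos ⟨h1, h2⟩]
      rfl
  · have hp : (decide ((t + 1) ∣ j) && !(mu.getD (j / (t + 1)) 0 == 0)) = false := by
      simp [h1]
    rw [hp, if_neg (by rintro ⟨hdd, -⟩; exact h1 hdd)]
    rfl

theorem pA_phase_spec (n : Nat) (Mo : Int) (mu : Array Int) (hmu : pvMuOK mu) :
    ∀ t : Nat,
    (pA_phase n Mo mu t).1 = (if t = 0 then 1 else pvMfib Mo (t - 1)) ∧
    (pA_phase n Mo mu t).2.1 = (if t = 0 then 0 else pvMfib Mo t) ∧
    (pA_phase n Mo mu t).2.2.1.size = n + 1 ∧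
    (pA_phase n Mo mu t).2.2.2.size = n + 1 ∧
    (∀ j : Nat, 1 ≤ j → j ≤ n →
      (pA_phase n Mo mu t).2.2.1.getD j 0 = ((pvLA Mo mu t j).map Prod.fst).foldl (pvMM Mo) 1 ∧
      (pA_phase n Mo mu t).2.2.2.getD j 0 = ((pvLA Mo mu t j).map Prod.snd).foldl (pvMM Mo) 1) ∧
    (pA_phase n Mo mu t).2.2.1.getD 0 0 = 1 ∧
    (pA_phase n Mo mu t).2.2.2.getD 0 0 = 1 := by
  intro t
  induction t with
  | zero =>
    refine ⟨rfl, rfl, Array.size_replicate, Array.size_replicate, ?_, ?_, ?_⟩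
    · intro j hj hjn
      constructor <;>
        simp [pA_phase, pvLA, pvDFA, Array.getD_eq_getD_getElem?, Array.getElem?_replicate,
          (by omega : j < n + 1)]
    · simp [pA_phase, Array.getD_eq_getD_getElem?, Array.getElem?_replicate]
    · simp [pA_phase, Array.getD_eq_getD_getElem?, Array.getElem?_replicate]
  | succ t ih =>
    obtain ⟨hA, hB, hs1, hs2, hcell, h01, h02⟩ := ih
    have hphase : pA_phase n Mo mu (t + 1) = pA_step n Mo mu (pA_phase n Mo mu t) (t + 1) :=
      pv_foldl_range'_succ _ _ t
    rcases hst : pA_phase n Mo mu t with ⟨Av, Bv, fA, frA⟩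
    rw [hst] at hphase hA hB hs1 hs2 hcell h01 h02
    simp only at hA hB hs1 hs2 hcell h01 h02
    rw [pA_step_eq] at hphase
    have hBv' : (Av + Bv) % Mo = pvMfib Mo (t + 1) := by
      cases t with
      | zero =>
        rw [hA, hB]
        simp [pvMfib]
      | succ s =>
        rw [hA, hB]
        simp only [Nat.succ_ne_zero, if_false, Nat.add_sub_cancel]
        exact pv_fib_add Mo s
    have hAv' : ((Av + Bv) % Mo - Av) % Mo = pvMfib Mo t := by
      rw [hBv']
      cases t with
      | zero =>
        rw [hA]
        simp only [if_pos rfl]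
        unfold pvMfib
        simp only [Nat.fib_one, Nat.fib_zero, Nat.cast_one, Nat.cast_zero, Int.zero_emod]
        rw [Int.sub_emod, Int.emod_emod_of_dvd _ dvd_rfl, ← Int.sub_emod]
        simp
      | succ s =>
        rw [hA]
        simp only [Nat.succ_ne_zero, if_false, Nat.add_sub_cancel]
        exact pv_fib_sub Mo s
    have hi : 0 < t + 1 := by omega
    have hbnd : ∀ k, 1 ≤ k → k < 1 + n / (t + 1) → k * (t + 1) < fA.size ∧ k * (t + 1) < frA.size := by
      intro k h1 h2
      have hle : k * (t + 1) ≤ (n / (t + 1)) * (t + 1) := Nat.mul_le_mul_right _ (by omega)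
      have := Nat.div_mul_le_self n (t + 1)
      omega
    obtain ⟨hrs1, hrs2, hrj⟩ := pA_inner_spec Mo mu (t + 1) hi ((Av + Bv) % Mo)
      (pvPow ((Av + Bv) % Mo) (Mo - 2).toNat Mo) (n / (t + 1)) 1 fA frA hbnd _ rfl
    rw [hphase]
    refine ⟨by simpa using hAv', by simpa using hBv', by simpa [hrs1] using hs1,
      by simpa [hrs2] using hs2, ?_, ?_, ?_⟩
    · intro j hj hjn
      by_cases hd : (t + 1) ∣ j
      · obtain ⟨hv1, hv2⟩ := (hrj j).2 ((pv_hit_iff (by omega) hj hjn).mpr hd)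
        obtain ⟨hc1, hc2⟩ := hcell j hj hjn
        have hw : pvPow ((Av + Bv) % Mo) (Mo - 2).toNat Mo = pvWneg Mo (t + 1) := by
          rw [pvWneg, hBv']
        rw [pvLA_succ]
        rcases hmu (j / (t + 1)) with hm | hm | hm
        · rw [if_pos hm] at hv1
          rw [if_neg (by rw [hm]; decide), if_neg (by rw [hm]; decide)] at hv2
          rw [if_pos ⟨hd, by rw [hm]; decide⟩, List.map_append, List.map_append,
            List.foldl_append, List.foldl_append]
          constructor
          · simp only []
            rw [hv1, hc1, hw, hm]
            simp [pvWp, pvMM]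
          · simp only []
            rw [hv2, hc2, hBv', hm]
            simp [pvWp, pvMM]
        · rw [if_neg (by rw [hm]; decide), if_pos hm] at hv1
          rw [if_neg (by rw [hm]; decide), if_pos hm] at hv2
          rw [if_neg (by rintro ⟨-, hne⟩; exact hne hm), List.append_nil]
          constructor
          · simp only []
            rw [hv1, hc1]
          · simp only []
            rw [hv2, hc2]
        · rw [if_neg (by rw [hm]; decide), if_neg (by rw [hm]; decide)] at hv1
          rw [if_pos hm] at hv2
          rw [if_pos ⟨hd, by rw [hm]; decide⟩, List.map_append, List.map_append,
            List.foldl_append, List.foldl_append]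
          constructor
          · simp only []
            rw [hv1, hc1, hBv', hm]
            simp [pvWp, pvMM]
          · simp only []
            rw [hv2, hc2, hw, hm]
            simp [pvWp, pvMM]
      · have hno := (hrj j).1 (fun hx => hd ((pv_hit_iff (by omega) hj hjn).mp hx))
        rw [pvLA_succ, if_neg (by rintro ⟨hdd, -⟩; exact hd hdd), List.append_nil]
        obtain ⟨hc1, hc2⟩ := hcell j hj hjn
        exact ⟨by simp only []; rw [hno.1, hc1], by simp only []; rw [hno.2, hc2]⟩
    · have hno := (hrj 0).1 (pv_no_hit_zero (by omega))
      simp only []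
      rw [hno.1, h01]
    · have hno := (hrj 0).1 (pv_no_hit_zero (by omega))
      simp only []
      rw [hno.2, h02]

-- ---- canonical lists: conversion, cut, nonemptiness ----

theorem pv_mem_D {t j i : Nat} :
    i ∈ pvD t j ↔ (1 ≤ i ∧ i < 1 + t ∧ i ∣ j ∧ pvMuI (j / i) ≠ 0) := by
  unfold pvD
  simp [List.mem_filter, List.mem_range'_1]
  tauto

theorem pv_D_cut {t j : Nat} (hj : 1 ≤ j) (hjt : j ≤ t) : pvD t j = pvD j j := by
  unfold pvD
  have hsplit : List.range' 1 t = List.range' 1 j ++ List.range' (1 + 1 * j) (t - j) := by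
    rw [List.range'_append]
    congr 1
    omega
  rw [hsplit, List.filter_append]
  have : List.filter (fun i => decide (i ∣ j) && !(pvMuI (j / i) == 0))
      (List.range' (1 + 1 * j) (t - j)) = [] := by
    rw [List.filter_eq_nil_iff]
    intro a ha
    rw [List.mem_range'_1] at ha
    have : ¬ (a ∣ j) := fun hd => by have := Nat.le_of_dvd (by omega) hd; omega
    simp [this]
  rw [this, List.append_nil]

-- pvLA with a mu array that agrees with the Moebius function is the canonical pvL
theorem pv_LA_eq_L (Mo : Int) (mu : Array Int) {n t j : Nat}
    (hmu : ∀ k, 1 ≤ k → k ≤ n → mu.getD k 0 = pvMuI k)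
    (hj : 1 ≤ j) (hjn : j ≤ n) (htn : t ≤ n) :
    pvLA Mo mu t j = pvL Mo t j := by
  unfold pvLA pvL pvDFA pvD
  have hflt : (List.range' 1 t).filter (fun i => decide (i ∣ j) && !(mu.getD (j / i) 0 == 0))
      = (List.range' 1 t).filter (fun i => decide (i ∣ j) && !(pvMuI (j / i) == 0)) := by
    refine List.filter_congr ?_
    intro x hx
    rw [List.mem_range'_1] at hx
    by_cases hd : x ∣ j
    · have hxj : x ≤ j := Nat.le_of_dvd (by omega) hd
      have hq1 : 1 ≤ j / x := Nat.div_pos hxj (by omega)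
      have hq2 : j / x ≤ n := le_trans (Nat.div_le_self j x) hjn
      rw [hmu _ hq1 hq2]
    · simp [hd]
  rw [hflt]
  refine List.map_congr_left ?_
  intro x hx
  rw [List.mem_filter] at hx
  obtain ⟨hx1, hx2⟩ := hx
  rw [List.mem_range'_1] at hx1
  simp only [Bool.and_eq_true, decide_eq_true_eq] at hx2
  obtain ⟨hd, -⟩ := hx2
  have hxj : x ≤ j := Nat.le_of_dvd (by omega) hd
  have hq1 : 1 ≤ j / x := Nat.div_pos hxj (by omega)
  have hq2 : j / x ≤ n := le_trans (Nat.div_le_self j x) hjn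
  rw [hmu _ hq1 hq2]

theorem pv_D_ne_nil {j : Nat} (hj : 1 ≤ j) : pvD j j ≠ [] := by
  intro h
  have : j ∈ pvD j j := by
    rw [pv_mem_D]
    refine ⟨hj, by omega, dvd_rfl, ?_⟩
    rw [Nat.div_self (by omega), pv_mu_one]
    decide
  rw [h] at this
  exact absurd this (List.not_mem_nil)

-- ---- B's sqrt-paired enumeration is a permutation of the divisors ----

theorem pv_mem_ED {j i : Nat} (hj : 1 ≤ j) :
    i ∈ pvED j ↔ (i ∣ j ∧ 1 ≤ i ∧ i ≤ j) := by
  unfold pvED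
  rw [List.mem_flatMap]
  constructor
  · rintro ⟨r, hr, hi⟩
    rw [List.mem_range'_1] at hr
    by_cases hmod : j % r = 0
    · rw [if_pos hmod] at hi
      have hrd : r ∣ j := Nat.dvd_of_mod_eq_zero hmod
      have hrj : r ≤ j := Nat.le_of_dvd (by omega) hrd
      by_cases hlt : r * r < j
      · rw [if_pos hlt] at hi
        simp only [List.mem_cons, List.mem_singleton, List.not_mem_nil, or_false] at hi
        rcases hi with hi | hi
        · subst hi; exact ⟨hrd, hr.1, hrj⟩
        · subst hi
          exact ⟨Nat.div_dvd_of_dvd hrd, Nat.div_pos hrj (by omega), Nat.div_le_self j r⟩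
      · rw [if_neg hlt] at hi
        simp only [List.mem_singleton] at hi
        subst hi
        exact ⟨hrd, hr.1, hrj⟩
    · rw [if_neg hmod] at hi
      exact absurd hi (List.not_mem_nil)
  · rintro ⟨hd, h1, h2⟩
    have hmod : j % i = 0 := Nat.mod_eq_zero_of_dvd hd
    by_cases hsq : i ≤ Nat.sqrt j
    · refine ⟨i, by rw [List.mem_range'_1]; omega, ?_⟩
      rw [if_pos hmod]
      by_cases hlt : i * i < j
      · rw [if_pos hlt]; exact List.mem_cons_self
      · rw [if_neg hlt]; exact List.mem_singleton_self i
    · have hii : j < i * i := by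
        by_contra hcon
        exact hsq (Nat.le_sqrt.mpr (by omega))
      have hq1 : 1 ≤ j / i := Nat.div_pos h2 (by omega)
      have hqi : j / i < i := by
        by_contra hcon
        have hx : i * i ≤ i * (j / i) := Nat.mul_le_mul_left i (by omega)
        have hmul : i * (j / i) = j := Nat.mul_div_cancel' hd
        omega
      have hqq : j / i * (j / i) < j := by
        have hmul : j / i * i = j := Nat.div_mul_cancel hd
        have := Nat.mul_lt_mul_of_le_of_lt (le_refl (j / i)) hqi hq1
        omega
      have hmem : j / i ∈ List.range' 1 (Nat.sqrt j) := by
        rw [List.mem_range'_1]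
        have hle : j / i ≤ Nat.sqrt j := Nat.le_sqrt.mpr (Nat.le_of_lt hqq)
        omega
      refine ⟨j / i, hmem, ?_⟩
      have hmod2 : j % (j / i) = 0 := Nat.mod_eq_zero_of_dvd (Nat.div_dvd_of_dvd hd)
      rw [if_pos hmod2, if_pos hqq, Nat.div_div_self hd (by omega)]
      exact List.mem_cons_of_mem _ List.mem_cons_self

-- a strict cofactor exceeds the square root
theorem pv_big_gt_sqrt {j r : Nat} (hd : r ∣ j) (h1 : 1 ≤ r) (hs : r ≤ Nat.sqrt j)
    (hlt : r * r < j) : Nat.sqrt j < j / r := by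
  by_contra hcon
  push_neg at hcon
  have hmul : r * (j / r) = j := Nat.mul_div_cancel' hd
  have hss : Nat.sqrt j * Nat.sqrt j ≤ j := Nat.sqrt_le j
  have hle : r * (j / r) ≤ Nat.sqrt j * Nat.sqrt j := Nat.mul_le_mul hs hcon
  have hj : j = Nat.sqrt j * Nat.sqrt j := by omega
  -- r ≤ sqrt, j / r ≤ sqrt, r * (j/r) = sqrt * sqrt forces r = sqrt = j / r
  have hs1 : 1 ≤ Nat.sqrt j := by
    by_contra h0
    have : Nat.sqrt j = 0 := by omega
    omega
  have hr_eq : r = Nat.sqrt j := by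
    by_contra hne
    have hrlt : r < Nat.sqrt j := by omega
    have : r * (j / r) < Nat.sqrt j * Nat.sqrt j :=
      Nat.mul_lt_mul_of_lt_of_le hrlt hcon hs1
    omega
  have hrr : r * r = j := by rw [hr_eq]; omega
  omega

theorem pv_nodup_ED (j : Nat) : (pvED j).Nodup := by
  unfold pvED
  rw [List.nodup_flatMap]
  constructor
  · intro r hr
    rw [List.mem_range'_1] at hr
    by_cases hmod : j % r = 0
    · rw [if_pos hmod]
      by_cases hlt : r * r < j
      · rw [if_pos hlt]
        have hbig : Nat.sqrt j < j / r :=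
          pv_big_gt_sqrt (Nat.dvd_of_mod_eq_zero hmod) hr.1 (by omega) hlt
        have hne : r ≠ j / r := by omega
        simp [List.nodup_cons, hne]
      · rw [if_neg hlt]
        exact List.nodup_singleton r
    · rw [if_neg hmod]
      exact List.nodup_nil
  · refine (List.pairwise_lt_range' (s := 1) (n := Nat.sqrt j) 1).imp_of_mem ?_
    intro r1 r2 hm1 hm2 hlt12
    rw [List.mem_range'_1] at hm1 hm2
    intro a ha hb
    simp only [] at ha hb
    by_cases hmod1 : j % r1 = 0
    · by_cases hmod2 : j % r2 = 0
      · rw [if_pos hmod1] at ha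
        rw [if_pos hmod2] at hb
        have hd1 : r1 ∣ j := Nat.dvd_of_mod_eq_zero hmod1
        have hd2 : r2 ∣ j := Nat.dvd_of_mod_eq_zero hmod2
        have hmul1 : r1 * (j / r1) = j := Nat.mul_div_cancel' hd1
        have hmul2 : r2 * (j / r2) = j := Nat.mul_div_cancel' hd2
        have ha' : a = r1 ∨ (r1 * r1 < j ∧ a = j / r1) := by
          by_cases hl1 : r1 * r1 < j
          · rw [if_pos hl1] at ha
            simp only [List.mem_cons, List.mem_singleton, List.not_mem_nil, or_false] at ha
            tauto
          · rw [if_neg hl1] at ha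
            simp only [List.mem_singleton] at ha
            tauto
        have hb' : a = r2 ∨ (r2 * r2 < j ∧ a = j / r2) := by
          by_cases hl2 : r2 * r2 < j
          · rw [if_pos hl2] at hb
            simp only [List.mem_cons, List.mem_singleton, List.not_mem_nil, or_false] at hb
            tauto
          · rw [if_neg hl2] at hb
            simp only [List.mem_singleton] at hb
            tauto
        have hbig1 : r1 * r1 < j → Nat.sqrt j < j / r1 := fun h =>
          pv_big_gt_sqrt hd1 (by omega) (by omega) h
        have hbig2 : r2 * r2 < j → Nat.sqrt j < j / r2 := fun h =>
          pv_big_gt_sqrt hd2 (by omega) (by omega) h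
        rcases ha' with ha' | ⟨hl1, ha'⟩ <;> rcases hb' with hb' | ⟨hl2, hb'⟩
        · omega
        · have := hbig2 hl2; omega
        · have := hbig1 hl1; omega
        · have hB1 := hbig1 hl1
          have hB2 := hbig2 hl2
          have heq : j / r1 = j / r2 := by omega
          have hx : r1 * (j / r1) = r2 * (j / r1) := by
            rw [heq] at hmul1 ⊢
            omega
          have : r1 = r2 := Nat.eq_of_mul_eq_mul_right (by omega) hx
          omega
      · rw [if_neg hmod2] at hb
        exact absurd hb (List.not_mem_nil)
    · rw [if_neg hmod1] at ha
      exact absurd ha (List.not_mem_nil)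

theorem pv_ED_perm {j : Nat} (hj : 1 ≤ j) :
    (pvED j).Perm ((List.range' 1 j).filter (fun i => decide (i ∣ j))) := by
  refine (List.perm_ext_iff_of_nodup (pv_nodup_ED j) ?_).mpr ?_
  · exact (List.nodup_range' (step := 1)).filter _
  · intro x
    rw [pv_mem_ED hj, List.mem_filter, List.mem_range'_1]
    constructor
    · rintro ⟨hd, h1, h2⟩
      exact ⟨⟨h1, by omega⟩, by simpa using hd⟩
    · rintro ⟨⟨h1, h2⟩, hd⟩
      exact ⟨by simpa using hd, h1, by omega⟩

-- ---- B-side loop characterizations ----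

theorem pB_fibLoop_cons (Mo : Int) (i : Nat) (is : List Nat) (a b : Int) (arr : Array Int) :
    pB_fibLoop Mo (i :: is) (a, b, arr) =
      pB_fibLoop Mo is (b, (a + b) % Mo, arr.setIfInBounds i b) := rfl

theorem pB_fibLoop_spec (Mo : Int) : ∀ (c s : Nat) (arr : Array Int), 1 ≤ s →
    ∀ r : Array Int,
      r = (pB_fibLoop Mo (List.range' s c) (pvMfib Mo (s - 1), pvMfib Mo s, arr)).2.2 →
    r.size = arr.size ∧ ∀ i : Nat,
      r.getD i 0 = if s ≤ i ∧ i < s + c ∧ i < arr.size then pvMfib Mo i else arr.getD i 0 := by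
  intro c
  induction c with
  | zero =>
    intro s arr hs r hr
    simp only [List.range'_zero, pB_fibLoop] at hr
    subst hr
    refine ⟨rfl, ?_⟩
    intro i
    rw [if_neg (by omega)]
  | succ c ih =>
    intro s arr hs r hr
    rw [List.range'_succ, pB_fibLoop_cons] at hr
    have hstep : (pvMfib Mo (s - 1) + pvMfib Mo s) % Mo = pvMfib Mo (s + 1) := by
      have h := pv_fib_add Mo (s - 1)
      rw [show s - 1 + 1 = s by omega, show s - 1 + 2 = s + 1 by omega] at h
      exact h
    rw [hstep] at hr
    have hr' : r = (pB_fibLoop Mo (List.range' (s + 1) c)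
        (pvMfib Mo (s + 1 - 1), pvMfib Mo (s + 1), arr.setIfInBounds s (pvMfib Mo s))).2.2 := by
      rw [show s + 1 - 1 = s by omega]
      exact hr
    obtain ⟨hsz, hget⟩ := ih (s + 1) (arr.setIfInBounds s (pvMfib Mo s)) (by omega) r hr'
    rw [Array.size_setIfInBounds] at hsz
    refine ⟨hsz, ?_⟩
    intro i
    rw [hget i, Array.size_setIfInBounds, pv_getD_set]
    by_cases hi : i = s
    · subst hi
      rw [if_neg (by omega)]
      by_cases hb : i < arr.size
      · rw [if_pos ⟨rfl, hb⟩, if_pos (by omega)]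
      · rw [if_neg (by omega), if_neg (by omega)]
    · by_cases hc2 : s + 1 ≤ i ∧ i < s + 1 + c ∧ i < arr.size
      · rw [if_pos hc2, if_pos (by omega)]
      · rw [if_neg hc2, if_neg (by rintro ⟨h, -⟩; exact hi h.symm), if_neg (by omega)]

theorem pB_fib_spec (n : Nat) (Mo : Int) :
    (pB_fib n Mo).size = n + 1 ∧ ∀ i : Nat, i ≤ n → (pB_fib n Mo).getD i 0 = pvMfib Mo i := by
  have h0 : pvMfib Mo 0 = 0 := by simp [pvMfib]
  have h1 : pvMfib Mo 1 = 1 % Mo := by simp [pvMfib]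
  have hr : pB_fib n Mo = (pB_fibLoop Mo (List.range' 1 n)
      (pvMfib Mo (1 - 1), pvMfib Mo 1, Array.replicate (n + 1) (0 : Int))).2.2 := by
    unfold pB_fib
    rw [show (1 : Nat) - 1 = 0 from rfl, h0, h1]
  obtain ⟨hsz, hget⟩ := pB_fibLoop_spec Mo n 1 (Array.replicate (n + 1) (0 : Int))
    (le_refl 1) _ hr
  rw [Array.size_replicate] at hsz
  refine ⟨hsz, ?_⟩
  intro i hi
  rw [hget i, Array.size_replicate]
  by_cases h : 1 ≤ i
  · rw [if_pos ⟨h, by omega, by omega⟩]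
  · have h0i : i = 0 := by omega
    subst h0i
    rw [if_neg (by omega), Array.getD_eq_getD_getElem?, Array.getElem?_replicate,
      if_pos (by omega)]
    simp [pvMfib]

theorem pv_map_getD (Mo : Int) (fib : Array Int) (i : Nat) (hi : i < fib.size) :
    (fib.map (fun x => pvPow x (Mo - 2).toNat Mo)).getD i 0 =
      pvPow (fib.getD i 0) (Mo - 2).toNat Mo := by
  rw [Array.getD_eq_getD_getElem?, Array.getD_eq_getD_getElem?, Array.getElem?_map,
    Array.getElem?_eq_getElem hi]
  rfl

-- fold of pB_useDiv over a list of divisors = pvMM-folds of the canonical weights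
theorem pB_fold_useDiv (Mo : Int) (n : Nat) (mu fib inv : Array Int)
    (hmu : ∀ k, 1 ≤ k → k ≤ n → mu.getD k 0 = pvMuI k)
    (hfib : ∀ i : Nat, i ≤ n → fib.getD i 0 = pvMfib Mo i)
    (hinv : ∀ i : Nat, i ≤ n → inv.getD i 0 = pvWneg Mo i)
    (j : Nat) (hj : 1 ≤ j) (hjn : j ≤ n) :
    ∀ (L : List Nat), (∀ i ∈ L, i ∣ j ∧ 1 ≤ i ∧ i ≤ j) → ∀ (st : Int × Int),
    L.foldl (pB_useDiv Mo mu fib inv j) st =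
      ((((L.filter (fun i => !(pvMuI (j / i) == 0))).map
          (fun i => pvWp Mo (pvMuI (j / i)) i)).map Prod.fst).foldl (pvMM Mo) st.1,
       (((L.filter (fun i => !(pvMuI (j / i) == 0))).map
          (fun i => pvWp Mo (pvMuI (j / i)) i)).map Prod.snd).foldl (pvMM Mo) st.2) := by
  intro L
  induction L with
  | nil => intro _ st; simp
  | cons i L ih =>
    intro hL st
    obtain ⟨hd, h1, h2⟩ := hL i List.mem_cons_self
    have hL' : ∀ x ∈ L, x ∣ j ∧ 1 ≤ x ∧ x ≤ j := fun x hx => hL x (List.mem_cons_of_mem _ hx)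
    have hq1 : 1 ≤ j / i := Nat.div_pos h2 (by omega)
    have hq2 : j / i ≤ n := le_trans (Nat.div_le_self j i) hjn
    have hmu' : mu.getD (j / i) 0 = pvMuI (j / i) := hmu _ hq1 hq2
    have hfib' : fib.getD i 0 = pvMfib Mo i := hfib i (by omega)
    have hinv' : inv.getD i 0 = pvWneg Mo i := hinv i (by omega)
    rw [List.foldl_cons]
    rcases pv_mu_or (j / i) with hm | hm | hm
    · -- mu = -1
      have hstep : pB_useDiv Mo mu fib inv j st i =
          (st.1 * pvWneg Mo i % Mo, st.2 * pvMfib Mo i % Mo) := by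
        unfold pB_useDiv
        rw [hmu', hm, hfib', hinv']
        norm_num
      rw [hstep, ih hL']
      have hflt : (i :: L).filter (fun i => !(pvMuI (j / i) == 0)) =
          i :: L.filter (fun i => !(pvMuI (j / i) == 0)) := by
        rw [List.filter_cons, if_pos (by rw [hm]; decide)]
      rw [hflt]
      simp only [List.map_cons, List.foldl_cons]
      rw [hm]
      simp [pvWp, pvMM]
    · -- mu = 0
      have hstep : pB_useDiv Mo mu fib inv j st i = st := by
        unfold pB_useDiv
        rw [hmu', hm]
        norm_num
      rw [hstep, ih hL']
      have hflt : (i :: L).filter (fun i => !(pvMuI (j / i) == 0)) =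
          L.filter (fun i => !(pvMuI (j / i) == 0)) := by
        rw [List.filter_cons, if_neg (by rw [hm]; decide)]
      rw [hflt]
    · -- mu = 1
      have hstep : pB_useDiv Mo mu fib inv j st i =
          (st.1 * pvMfib Mo i % Mo, st.2 * pvWneg Mo i % Mo) := by
        unfold pB_useDiv
        rw [hmu', hm, hfib', hinv']
        norm_num
      rw [hstep, ih hL']
      have hflt : (i :: L).filter (fun i => !(pvMuI (j / i) == 0)) =
          i :: L.filter (fun i => !(pvMuI (j / i) == 0)) := by
        rw [List.filter_cons, if_pos (by rw [hm]; decide)]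
      rw [hflt]
      simp only [List.map_cons, List.foldl_cons]
      rw [hm]
      simp [pvWp, pvMM]

theorem pv_foldl_flatMap {σ : Type} (l : List Nat) (g : Nat → List Nat) (f : σ → Nat → σ)
    (s : σ) : (l.flatMap g).foldl f s = l.foldl (fun s a => (g a).foldl f s) s := by
  induction l generalizing s with
  | nil => rfl
  | cons a l ih => simp [List.flatMap_cons, List.foldl_append, ih]

-- the r-loop is the useDiv-fold over the enumeration pvED
theorem pB_rLoop_eq (Mo : Int) (mu fib inv : Array Int) (j : Nat) (st : Int × Int) :
    (List.range' 1 (Nat.sqrt j)).foldl (pB_rStep Mo mu fib inv j) st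
      = (pvED j).foldl (pB_useDiv Mo mu fib inv j) st := by
  unfold pvED
  rw [pv_foldl_flatMap]
  have hfun : ∀ (st : Int × Int) (r : Nat), pB_rStep Mo mu fib inv j st r =
      (if j % r = 0 then (if r * r < j then [r, j / r] else [r]) else []).foldl
        (pB_useDiv Mo mu fib inv j) st := by
    intro st r
    unfold pB_rStep
    split_ifs <;> rfl
  have : ∀ (l : List Nat) (st : Int × Int),
      l.foldl (pB_rStep Mo mu fib inv j) st =
      l.foldl (fun st r => (if j % r = 0 then (if r * r < j then [r, j / r] else [r]) else []).foldl
        (pB_useDiv Mo mu fib inv j) st) st := by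
    intro l
    induction l with
    | nil => intro st; rfl
    | cons x xs ihx => intro st; rw [List.foldl_cons, List.foldl_cons, hfun, ihx]
  exact this _ st

-- ---- per-cell equality and the prefix chain ----

theorem pv_foldl_mm_perm (Mo x : Int) {l1 l2 : List Int} (h : l1.Perm l2) :
    l1.foldl (pvMM Mo) x = l2.foldl (pvMM Mo) x := by
  rw [pv_foldl_mm, pv_foldl_mm, h.prod_eq]
  have hlen := h.length_eq
  cases l1 with
  | nil =>
    cases l2 with
    | nil => rfl
    | cons b l2 => simp at hlen
  | cons a l1 =>
    cases l2 with
    | nil => simp at hlen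
    | cons b l2 => rfl

-- B's filtered weight list is a permutation of the canonical one
theorem pv_cell_perm (Mo : Int) {j : Nat} (hj : 1 ≤ j) :
    (((pvED j).filter (fun i => !(pvMuI (j / i) == 0))).map
        (fun i => pvWp Mo (pvMuI (j / i)) i)).Perm (pvL Mo j j) := by
  have hperm := (pv_ED_perm hj).filter (fun i => !(pvMuI (j / i) == 0))
  have hcut : ((List.range' 1 j).filter (fun i => decide (i ∣ j))).filter
      (fun i => !(pvMuI (j / i) == 0)) = pvD j j := by
    rw [List.filter_filter]
    unfold pvD
    refine List.filter_congr ?_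
    intro x hx
    exact Bool.and_comm _ _
  rw [hcut] at hperm
  exact hperm.map _

theorem pv_cellF_pos (Mo : Int) {j : Nat} (hj : 1 ≤ j) (x : Int) :
    ((pvL Mo j j).map Prod.fst).foldl (pvMM Mo) x = x * ((pvL Mo j j).map Prod.fst).prod % Mo := by
  rw [pv_foldl_mm]
  have hne : pvL Mo j j ≠ [] := by
    unfold pvL
    intro h
    exact pv_D_ne_nil hj (List.map_eq_nil_iff.mp h)
  have : ((pvL Mo j j).map Prod.fst).isEmpty = false := by
    rw [List.isEmpty_eq_false_iff, ← List.length_pos_iff, List.length_map,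
      List.length_pos_iff]
    exact hne
  rw [this]
  simp

theorem pv_cellR_pos (Mo : Int) {j : Nat} (hj : 1 ≤ j) (x : Int) :
    ((pvL Mo j j).map Prod.snd).foldl (pvMM Mo) x = x * ((pvL Mo j j).map Prod.snd).prod % Mo := by
  rw [pv_foldl_mm]
  have hne : pvL Mo j j ≠ [] := by
    unfold pvL
    intro h
    exact pv_D_ne_nil hj (List.map_eq_nil_iff.mp h)
  have : ((pvL Mo j j).map Prod.snd).isEmpty = false := by
    rw [List.isEmpty_eq_false_iff, ← List.length_pos_iff, List.length_map,
      List.length_pos_iff]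
    exact hne
  rw [this]
  simp

-- chain step: starting the cell fold from x instead of 1 and reducing once more is the same
theorem pv_chain_stepF (Mo : Int) {j : Nat} (hj : 1 ≤ j) (x : Int) :
    ((pvL Mo j j).map Prod.fst).foldl (pvMM Mo) x = x * pvCellF Mo j % Mo := by
  rw [pv_cellF_pos Mo hj x]
  unfold pvCellF
  rw [pv_cellF_pos Mo hj 1, one_mul, pv_mul_mod_mod]

theorem pv_chain_stepR (Mo : Int) {j : Nat} (hj : 1 ≤ j) (x : Int) :
    ((pvL Mo j j).map Prod.snd).foldl (pvMM Mo) x = x * pvCellR Mo j % Mo := by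
  rw [pv_cellR_pos Mo hj x]
  unfold pvCellR
  rw [pv_cellR_pos Mo hj 1, one_mul, pv_mul_mod_mod]

-- cut for the canonical list
theorem pv_L_cut (Mo : Int) {t j : Nat} (hj : 1 ≤ j) (hjt : j ≤ t) :
    pvL Mo t j = pvL Mo j j := by
  unfold pvL
  rw [pv_D_cut hj hjt]

-- ---- A's prefix pass produces the chain ----

theorem pvPrefix_spec (n : Nat) (Mo : Int) (cell : Nat → Int) (arr : Array Int)
    (hsz : arr.size = n + 1) (h0 : arr.getD 0 0 = 1)
    (hc : ∀ m, 1 ≤ m → m ≤ n → arr.getD m 0 = cell m) :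
    (pvPrefix n Mo arr).size = n + 1 ∧
    ∀ m, m ≤ n → (pvPrefix n Mo arr).getD m 0 = pvChain Mo cell m := by
  have main : ∀ t, t ≤ n →
      ((List.range' 1 t).foldl
        (fun a i => a.setIfInBounds i (a.getD (i - 1) 0 * a.getD i 0 % Mo)) arr).size = n + 1 ∧
      ∀ m, m ≤ n →
        ((List.range' 1 t).foldl
          (fun a i => a.setIfInBounds i (a.getD (i - 1) 0 * a.getD i 0 % Mo)) arr).getD m 0 =
        if m ≤ t then pvChain Mo cell m else arr.getD m 0 := by
    intro t
    induction t with
    | zero =>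
      intro _
      refine ⟨hsz, ?_⟩
      intro m hm
      by_cases h : m ≤ 0
      · have : m = 0 := by omega
        subst this
        simp only [if_pos (le_refl 0)]
        exact h0
      · rw [if_neg h]
        rfl
    | succ t ih =>
      intro ht
      obtain ⟨ihs, ihg⟩ := ih (by omega)
      rw [pv_foldl_range'_succ]
      refine ⟨by rw [Array.size_setIfInBounds, ihs], ?_⟩
      intro m hm
      rw [pv_getD_set, ihs]
      by_cases he : t + 1 = m
      · subst he
        rw [if_pos ⟨rfl, by omega⟩, if_pos (le_refl _)]
        have hprev : t + 1 - 1 = t := by omega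
        rw [hprev, ihg t (by omega), if_pos (le_refl t), ihg (t + 1) (by omega),
          if_neg (by omega), hc (t + 1) (by omega) (by omega)]
        rfl
      · rw [if_neg (by rintro ⟨h, -⟩; exact he h), ihg m hm]
        by_cases hle : m ≤ t
        · rw [if_pos hle, if_pos (by omega)]
        · rw [if_neg hle, if_neg (by omega)]
  obtain ⟨hs, hg⟩ := main n (le_refl n)
  refine ⟨hs, ?_⟩
  intro m hm
  have := hg m hm
  rw [if_pos hm] at this
  exact this

-- ---- B's fused pass produces the same chains ----

def pB_main (Mo : Int) (mu fib inv : Array Int) (t : Nat) : List Int × List Int × Int × Int :=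
  (List.range' 1 t).foldl (pB_jStep Mo mu fib inv) ([1], [1], 1, 1)

theorem pB_main_spec (Mo : Int) (n : Nat) (mu fib inv : Array Int)
    (hmu : ∀ k, 1 ≤ k → k ≤ n → mu.getD k 0 = pvMuI k)
    (hfib : ∀ i : Nat, i ≤ n → fib.getD i 0 = pvMfib Mo i)
    (hinv : ∀ i : Nat, i ≤ n → inv.getD i 0 = pvWneg Mo i) :
    ∀ t, t ≤ n → pB_main Mo mu fib inv t =
      ((List.range (t + 1)).map (pvChain Mo (pvCellF Mo)),
       (List.range (t + 1)).map (pvChain Mo (pvCellR Mo)),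
       pvChain Mo (pvCellF Mo) t, pvChain Mo (pvCellR Mo) t) := by
  intro t
  induction t with
  | zero => intro _; rfl
  | succ t ih =>
    intro ht
    have hstep : pB_main Mo mu fib inv (t + 1) =
        pB_jStep Mo mu fib inv (pB_main Mo mu fib inv t) (t + 1) :=
      pv_foldl_range'_succ _ _ t
    rw [hstep, ih (by omega)]
    set j := t + 1 with hjdef
    have hj : 1 ≤ j := by omega
    have hjn : j ≤ n := ht
    -- the r-loop equals the canonical cell fold
    have hfold : ∀ st : Int × Int,
        (List.range' 1 (Nat.sqrt j)).foldl (pB_rStep Mo mu fib inv j) st =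
          (((pvL Mo j j).map Prod.fst).foldl (pvMM Mo) st.1,
           ((pvL Mo j j).map Prod.snd).foldl (pvMM Mo) st.2) := by
      intro st
      rw [pB_rLoop_eq]
      have hEDmem : ∀ i ∈ pvED j, i ∣ j ∧ 1 ≤ i ∧ i ≤ j := by
        intro i hi
        exact (pv_mem_ED hj).mp hi
      rw [pB_fold_useDiv Mo n mu fib inv hmu hfib hinv j hj hjn (pvED j) hEDmem st]
      have hperm := pv_cell_perm Mo (j := j) hj
      rw [pv_foldl_mm_perm Mo st.1 (hperm.map Prod.fst),
        pv_foldl_mm_perm Mo st.2 (hperm.map Prod.snd)]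
    unfold pB_jStep
    simp only [hfold (pvChain Mo (pvCellF Mo) t, pvChain Mo (pvCellR Mo) t)]
    rw [pv_chain_stepF Mo hj, pv_chain_stepR Mo hj]
    have hrange : List.range (j + 1) = List.range j ++ [j] := List.range_succ
    rw [hrange, List.map_append, List.map_append]
    show (_ ++ [pvChain Mo (pvCellF Mo) t * pvCellF Mo j % Mo],
          _ ++ [pvChain Mo (pvCellR Mo) t * pvCellR Mo j % Mo],
          pvChain Mo (pvCellF Mo) t * pvCellF Mo j % Mo,
          pvChain Mo (pvCellR Mo) t * pvCellR Mo j % Mo) =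
         (_ ++ [pvChain Mo (pvCellF Mo) j], _ ++ [pvChain Mo (pvCellR Mo) j],
          pvChain Mo (pvCellF Mo) j, pvChain Mo (pvCellR Mo) j)
    rw [hjdef]
    rfl

-- ---- main equivalence ----

theorem pv_main (max_n MOD : Int) (h1 : 1 ≤ max_n) (_h2 : 1 ≤ MOD ∨ MOD = -1) :
    precompute_f_fr_py max_n MOD = precompute_f_fr_py_alt max_n MOD := by
  set n := max_n.toNat with hn
  set Mo := MOD with hMo
  have hmuA : ∀ k, 1 ≤ k → k ≤ n → (pvMuSieve n).getD k 0 = pvMuI k := pv_muSieve_eq n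
  have hmuB : ∀ k, 1 ≤ k → k ≤ n → (pB_mu n).getD k 0 = pvMuI k := pv_pBmu_eq n
  obtain ⟨hfsz, hfget⟩ := pB_fib_spec n Mo
  have hinv : ∀ i : Nat, i ≤ n →
      ((pB_fib n Mo).map (fun x => pvPow x (Mo - 2).toNat Mo)).getD i 0 = pvWneg Mo i := by
    intro i hi
    rw [pv_map_getD Mo _ i (by rw [hfsz]; omega), hfget i hi, pvWneg]
  -- A side: phase cells are the canonical cell values
  obtain ⟨-, -, hAs1, hAs2, hAcell, hA01, hA02⟩ :=
    pA_phase_spec n Mo (pvMuSieve n) (pv_muOK_sieve n) n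
  have hcellF : ∀ m, 1 ≤ m → m ≤ n →
      (pA_phase n Mo (pvMuSieve n) n).2.2.1.getD m 0 = pvCellF Mo m := by
    intro m h1m h2m
    rw [(hAcell m h1m h2m).1, pv_LA_eq_L Mo (pvMuSieve n) hmuA h1m h2m (le_refl n),
      pv_L_cut Mo h1m h2m]
    rfl
  have hcellR : ∀ m, 1 ≤ m → m ≤ n →
      (pA_phase n Mo (pvMuSieve n) n).2.2.2.getD m 0 = pvCellR Mo m := by
    intro m h1m h2m
    rw [(hAcell m h1m h2m).2, pv_LA_eq_L Mo (pvMuSieve n) hmuA h1m h2m (le_refl n),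
      pv_L_cut Mo h1m h2m]
    rfl
  obtain ⟨hPs1, hPg1⟩ := pvPrefix_spec n Mo (pvCellF Mo)
    (pA_phase n Mo (pvMuSieve n) n).2.2.1 hAs1 hA01 hcellF
  obtain ⟨hPs2, hPg2⟩ := pvPrefix_spec n Mo (pvCellR Mo)
    (pA_phase n Mo (pvMuSieve n) n).2.2.2 hAs2 hA02 hcellR
  -- B side
  have hB := pB_main_spec Mo n (pB_mu n) (pB_fib n Mo)
    ((pB_fib n Mo).map (fun x => pvPow x (Mo - 2).toNat Mo)) hmuB hfget hinv n (le_refl n)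
  -- assemble
  have hout1 : (pvPrefix n Mo (pA_phase n Mo (pvMuSieve n) n).2.2.1).toList =
      (List.range (n + 1)).map (pvChain Mo (pvCellF Mo)) := by
    refine List.ext_getElem (by simp [hPs1]) ?_
    intro m hm1 hm2
    have hmn : m ≤ n := by simp [hPs1] at hm1; omega
    have hg := hPg1 m hmn
    rw [Array.getD_eq_getD_getElem?, Array.getElem?_eq_getElem (by omega)] at hg
    simpa using hg
  have hout2 : (pvPrefix n Mo (pA_phase n Mo (pvMuSieve n) n).2.2.2).toList =
      (List.range (n + 1)).map (pvChain Mo (pvCellR Mo)) := by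
    refine List.ext_getElem (by simp [hPs2]) ?_
    intro m hm1 hm2
    have hmn : m ≤ n := by simp [hPs2] at hm1; omega
    have hg := hPg2 m hmn
    rw [Array.getD_eq_getD_getElem?, Array.getElem?_eq_getElem (by omega)] at hg
    simpa using hg
  show ((pvPrefix n Mo (pA_phase n Mo (pvMuSieve n) n).2.2.1).toList,
        (pvPrefix n Mo (pA_phase n Mo (pvMuSieve n) n).2.2.2).toList) =
       ((pB_main Mo (pB_mu n) (pB_fib n Mo)
          ((pB_fib n Mo).map (fun x => pvPow x (Mo - 2).toNat Mo)) n).1,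
        (pB_main Mo (pB_mu n) (pB_fib n Mo)
          ((pB_fib n Mo).map (fun x => pvPow x (Mo - 2).toNat Mo)) n).2.1)
  rw [hB, hout1, hout2]

-- ===== VERDICT (by name: the statement is the Claim_ definition above) =====
theorem precompute_f_fr_py_spec : Claim_equal_precompute_f_fr_py := by
  intro max_n MOD _ hpre
  exact pv_main max_n MOD hpre.1 hpre.2
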